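-- pv_equiv track=rewrite | github.com/Miranda0428/coding_practice | This_is_coding_test/p327_Q11.py | solution
-- ===== SOURCE A (Python) =====
-- from collections import deque
--
-- def turn_right(dir):
--     if dir==3:
--         dir = 0
--     else:
--         dir += 1
--     return dir
--
-- def turn_left(dir):
--     if dir==0:
--         dir = 3
--     else:
--         dir -= 1
--     return dir
--
-- def solution(mat_size, apples, turns):
--     mat = [[0 for _ in range(mat_size)] for _ in range(mat_size)]
--
--     for apple in apples:
--         mat[apple[0]-1][apple[1]-1] = 1
--
--     tail = deque()
--     pre_T = 0
--     dir = 0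
--     dx = [0, 1, 0, -1]
--     dy = [1, 0, -1, 0]
--     head_x = 0
--     head_y = 0
--     time = 0
--     tail.append((0, 0))
--     for T in turns:
--         k = int(T[0]) - pre_T
--         pre_T = int(T[0])
--         for i in range(1, k+1):
--             head_x += dx[dir]
--             head_y += dy[dir]
--             if(head_x < 0 or head_x >= mat_size or head_y < 0 or head_y >= mat_size or mat[head_x][head_y]==2):
--                 return time + 1
--             elif(mat[head_x][head_y]==1): # 사과면
--                 mat[head_x][head_y] = 2
--                 tail.append((head_x, head_y))
--                 time += 1
--             else:
--                 mat[head_x][head_y] = 2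
--                 tail.append((head_x, head_y))
--                 time += 1
--                 tail_x, tail_y = tail.popleft()
--                 mat[tail_x][tail_y] = 0
--
--         if T[1] == 'D':
--             dir = turn_right(dir)
--         else:
--             dir = turn_left(dir)
--
--     while True:
--         head_x += dx[dir]
--         head_y += dy[dir]
--         if (head_x < 0 or head_x >= mat_size or head_y < 0 or head_y >= mat_size or mat[head_x][head_y] == 2):
--             return time + 1
--         elif (mat[head_x][head_y] == 1):  # 사과면
--             mat[head_x][head_y] = 2
--             tail.append((head_x, head_y))
--             time += 1
--         else:
--             mat[head_x][head_y] = 2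
--             tail.append((head_x, head_y))
--             time += 1
--             tail_x, tail_y = tail.popleft()
--             mat[tail_x][tail_y] = 0
-- ===== SOURCE B (Python) =====
-- def solution(mat_size, apples, turns):
--     # Phase 1: the head trajectory is pure geometry, fixed by the turn schedule
--     # alone; compute it first, up to and including the first off-board cell.
--     # A turn given with time T fires after cumulative max(0, T - previous T) more moves.
--     ts = []
--     pre = eff = 0
--     for T in turns:
--         ti = int(T[0])
--         if ti > pre:
--             eff += ti - pre
--         pre = ti
--         ts.append((eff, T[1]))
--     i = 0
--     x, y, dx, dy, t = 0, 0, 0, 1, 0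
--     path = [(0, 0)]
--     while True:
--         while i < len(ts) and ts[i][0] <= t:
--             dx, dy = (dy, -dx) if ts[i][1] == 'D' else (-dy, dx)
--             i += 1
--         t += 1
--         x, y = x + dx, y + dy
--         path.append((x, y))
--         if not (0 <= x < mat_size and 0 <= y < mat_size):
--             break
--     # Phase 2: scan the fixed trajectory; the body is a sliding window over it,
--     # whose trailing cell at step t is path[t - length] (no queue is kept).
--     pantry = {(a[0] - 1, a[1] - 1) for a in apples}
--     occupied = set()
--     length = 1
--     for t in range(1, len(path)):
--         head = path[t]
--         if not (0 <= head[0] < mat_size and 0 <= head[1] < mat_size) or head in occupied: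
--             return t
--         occupied.add(head)
--         if head in pantry:
--             pantry.discard(head)
--             length += 1
--         else:
--             occupied.discard(path[t - length])
-- ===== Notes on version B (the rewrite author's own statement) =====
-- stated objective: alternative
-- what changed: B is staged instead of interleaved: a first pass computes the head's whole trajectory (pure geometry, fixed by the turn schedule alone, independent of apples and collisions) up to the first off-board cell; a second pass then scans that fixed trajectory, treating the snake body as a sliding window over it whose trailing cell is found by index arithmetic path[t - length] - no n*n grid, no deque, and no per-step game logic mixed into the geometry.
-- outside the precondition, e.g. on solution(4, [[1, -2]], [['2', 'D'], ['1', 'D']]): A returns 3, B returns 5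
import Mathlib
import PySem

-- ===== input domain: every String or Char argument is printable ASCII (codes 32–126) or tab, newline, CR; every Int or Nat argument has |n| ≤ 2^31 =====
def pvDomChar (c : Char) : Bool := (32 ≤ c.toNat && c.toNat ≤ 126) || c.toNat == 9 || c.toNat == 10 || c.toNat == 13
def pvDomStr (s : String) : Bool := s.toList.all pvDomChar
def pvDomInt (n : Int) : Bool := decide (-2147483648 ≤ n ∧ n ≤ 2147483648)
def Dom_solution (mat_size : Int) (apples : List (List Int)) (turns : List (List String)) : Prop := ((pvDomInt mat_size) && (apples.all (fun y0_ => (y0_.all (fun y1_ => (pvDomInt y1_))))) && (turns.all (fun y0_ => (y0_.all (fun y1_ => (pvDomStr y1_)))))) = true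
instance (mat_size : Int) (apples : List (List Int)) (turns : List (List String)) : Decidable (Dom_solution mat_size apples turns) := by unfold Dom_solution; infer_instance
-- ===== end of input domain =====

-- B is staged where A is interleaved: B first computes the head's whole trajectory (pure
-- geometry fixed by the turn schedule alone), then scans that fixed trajectory with a
-- sliding body window (trailing cell found by index arithmetic); objective: alternative.

-- ===== PORT A =====
-- A's direction tables and turn helpers
def dxA : List Int := [0, 1, 0, -1]
def dyA : List Int := [1, 0, -1, 0]

def turnRight (dir : Int) : Int := if dir = 3 then 0 else dir + 1
def turnLeft (dir : Int) : Int := if dir = 0 then 3 else dir - 1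

-- mat[i][j] read / write (Python indexing; exact on the in-range indices A uses under Pre_)
def cellA (mat : List (List Int)) (i j : Int) : Int :=
  PySem.List.pyGetD (PySem.List.pyGetD mat i []) j 0

def setA (mat : List (List Int)) (i j : Int) (v : Int) : List (List Int) :=
  PySem.List.pySetD mat i (PySem.List.pySetD (PySem.List.pyGetD mat i []) j v)

-- A's mutable loop state: mat, tail deque, head position, time, direction
structure AS where
  mat : List (List Int)
  dq : List (Int × Int)
  hx : Int
  hy : Int
  time : Int
  dir : Int

-- one iteration of A's per-step body (shared verbatim by the inner loop and the trailing while)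
def moveA (n : Int) (s : AS) : Sum Int AS :=
  let hx := s.hx + PySem.List.pyGetD dxA s.dir 0
  let hy := s.hy + PySem.List.pyGetD dyA s.dir 0
  if hx < 0 ∨ hx ≥ n ∨ hy < 0 ∨ hy ≥ n ∨ cellA s.mat hx hy = 2 then .inl (s.time + 1)
  else if cellA s.mat hx hy = 1 then
    .inr ⟨setA s.mat hx hy 2, s.dq ++ [(hx, hy)], hx, hy, s.time + 1, s.dir⟩
  else
    let mat := setA s.mat hx hy 2
    let dq := s.dq ++ [(hx, hy)]
    match dq with
    | [] => .inr ⟨mat, [], hx, hy, s.time + 1, s.dir⟩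
    | (tx, ty) :: rest => .inr ⟨setA mat tx ty 0, rest, hx, hy, s.time + 1, s.dir⟩

-- 'for i in range(1, k+1)'
def innerA (n : Int) (k : Nat) (s : AS) : Sum Int AS :=
  match k with
  | 0 => .inr s
  | k + 1 =>
    match moveA n s with
    | .inl r => .inl r
    | .inr s' => innerA n k s'

-- 'for T in turns'
def outerA (n : Int) (turns : List (List String)) (preT : Int) (s : AS) : Sum Int AS :=
  match turns with
  | [] => .inr s
  | T :: rest =>
    let tT := (PySem.Int.ofStr? (PySem.List.pyGetD T 0 "")).getD 0
    match innerA n (tT - preT).toNat s with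
    | .inl r => .inl r
    | .inr s' =>
      outerA n rest tT
        ⟨s'.mat, s'.dq, s'.hx, s'.hy, s'.time,
         if PySem.List.pyGetD T 1 "" = "D" then turnRight s'.dir else turnLeft s'.dir⟩

-- trailing 'while True' (fuel: straight-line motion leaves the board within mat_size moves)
def trailA (n : Int) (fuel : Nat) (s : AS) : Int :=
  match fuel with
  | 0 => 0
  | f + 1 =>
    match moveA n s with
    | .inl r => r
    | .inr s' => trailA n f s'

def solution (mat_size : Int) (apples : List (List Int)) (turns : List (List String)) : Int :=
  let mat0 : List (List Int) :=
    List.replicate mat_size.toNat (List.replicate mat_size.toNat 0)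
  let mat := apples.foldl
    (fun m a => setA m (PySem.List.pyGetD a 0 0 - 1) (PySem.List.pyGetD a 1 0 - 1) 1) mat0
  match outerA mat_size turns 0 ⟨mat, [(0, 0)], 0, 0, 0, 0⟩ with
  | .inl r => r
  | .inr s => trailA mat_size (mat_size.toNat + 1) s
-- ===== PORT B =====
-- "for T in turns: ... ts.append((eff, T[1]))" — effective firing times of the turns
def effTs : List (List String) → Int → Int → List (Int × String)
  | [], _, _ => []
  | T :: rest, pre, eff =>
    let ti := (PySem.Int.ofStr? (PySem.List.pyGetD T 0 "")).getD 0
    let eff' := if ti > pre then eff + (ti - pre) else eff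
    (eff', PySem.List.pyGetD T 1 "") :: effTs rest ti eff'

-- the inner "while i < len(ts) and ts[i][0] <= t" applying the due turns to (dx, dy)
def eatA : List (Int × String) → Int → Int → Int → (Int × Int) × List (Int × String)
  | [], _, dx, dy => ((dx, dy), [])
  | (tt, cmd) :: rest, t, dx, dy =>
    if tt ≤ t then
      if cmd = "D" then eatA rest t dy (-dx) else eatA rest t (-dy) dx
    else ((dx, dy), (tt, cmd) :: rest)

-- Phase 1 of Source B: the 'while True' building the head trajectory up to and including the
-- first off-board cell (fuel: after the last effective turn the head moves straight off board)
def gen (n : Int) :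
    Nat → Int → Int → Int → Int → Int → List (Int × String) → List (Int × Int) → List (Int × Int)
  | 0, _, _, _, _, _, _, acc => acc
  | f + 1, t, x, y, dx, dy, ts, acc =>
    let d := eatA ts t dx dy
    let x' := x + d.1.1
    let y' := y + d.1.2
    if ¬(0 ≤ x' ∧ x' < n ∧ 0 ≤ y' ∧ y' < n) then acc ++ [(x', y')]
    else gen n f (t + 1) x' y' d.1.1 d.1.2 d.2 (acc ++ [(x', y')])

-- Phase 2 of Source B: 'for t in range(1, len(path))' over the fixed trajectory; the body is a
-- sliding window whose trailing cell at step t is path[t - length] (its fuel is exactly the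
-- range length; Python falls off the loop only if the trajectory had no off-board end)
def scanB (n : Int) (path : List (Int × Int)) :
    Nat → Nat → PySem.Set (Int × Int) → PySem.Set (Int × Int) → Nat → Int
  | 0, _, _, _, _ => 0
  | k + 1, t, occ, pantry, len =>
    let head := path.getD t (0, 0)
    if ¬(0 ≤ head.1 ∧ head.1 < n ∧ 0 ≤ head.2 ∧ head.2 < n) ∨ head ∈ occ then (t : Int)
    else
      let occ' := PySem.Set.add occ head
      if head ∈ pantry then
        scanB n path k (t + 1) occ' (PySem.Set.discard pantry head) (len + 1)
      else
        scanB n path k (t + 1) (PySem.Set.discard occ' (path.getD (t - len) (0, 0))) pantry len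

def solution_alt (mat_size : Int) (apples : List (List Int)) (turns : List (List String)) : Int :=
  let ts := effTs turns 0 0
  let fuelG : Nat := ((ts.map Prod.fst).foldl max 0).toNat + mat_size.toNat + 2
  let path := gen mat_size fuelG 0 0 0 0 1 ts [(0, 0)]
  let pantry : PySem.Set (Int × Int) := PySem.Set.ofList (apples.map (fun a =>
    (PySem.List.pyGetD a 0 0 - 1, PySem.List.pyGetD a 1 0 - 1)))
  scanB mat_size path (path.length - 1) 1 PySem.Set.empty pantry 1

-- ===== PRECONDITION & SPEC =====
-- Pre_ restricts to the natural domain of the snake puzzle: turn entries of length >= 2 whose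
-- times parse as ints (else A raises); and either a positive board with apples given as in-board
-- coordinate pairs NOT on the start cell (1,1) (out-of-board apples make A raise an IndexError or
-- wrap a 0-coordinate to the last row; an apple on the occupied start cell is a corner nobody
-- specifies — A silently deletes it when the tail leaves the cell), or a non-positive board with
-- no apples (the snake dies on its first move), or an empty schedule with apples anywhere A's
-- indexing accepts (the snake then runs straight into the wall at time mat_size, apples or not).
def Pre_solution (mat_size : Int) (apples : List (List Int)) (turns : List (List String)) : Prop :=
  (∀ T ∈ turns, 2 ≤ T.length ∧ (PySem.Int.ofStr? (PySem.List.pyGetD T 0 "")).isSome) ∧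
  ((1 ≤ mat_size ∧
    (∀ a ∈ apples, 2 ≤ a.length ∧
      (1 ≤ PySem.List.pyGetD a 0 0 ∧ PySem.List.pyGetD a 0 0 ≤ mat_size ∧
       1 ≤ PySem.List.pyGetD a 1 0 ∧ PySem.List.pyGetD a 1 0 ≤ mat_size) ∧
      ¬(PySem.List.pyGetD a 0 0 = 1 ∧ PySem.List.pyGetD a 1 0 = 1))) ∨
   (mat_size ≤ 0 ∧ apples = []) ∨
   (turns = [] ∧ 1 ≤ mat_size ∧ ∀ a ∈ apples, 2 ≤ a.length ∧
     1 - mat_size ≤ PySem.List.pyGetD a 0 0 ∧ PySem.List.pyGetD a 0 0 ≤ mat_size ∧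
     1 - mat_size ≤ PySem.List.pyGetD a 1 0 ∧ PySem.List.pyGetD a 1 0 ≤ mat_size))

instance (mat_size : Int) (apples : List (List Int)) (turns : List (List String)) : Decidable (Pre_solution mat_size apples turns) := by
  unfold Pre_solution; infer_instance

def pvWitness_solution : Int × List (List Int) × List (List String) :=
  (2, [[1, 2]], [["2", "D"]])

def Spec_solution (mat_size : Int) (apples : List (List Int)) (turns : List (List String)) (out : Int) : Prop := out = solution_alt mat_size apples turns
instance (mat_size : Int) (apples : List (List Int)) (turns : List (List String)) (out : Int) : Decidable (Spec_solution mat_size apples turns out) := by unfold Spec_solution; infer_instance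

-- ===== CLAIM (what is proved, stated in full; the proofs are below) =====
def Claim_equal_solution : Prop := ∀ (mat_size : Int) (apples : List (List Int)) (turns : List (List String)), Dom_solution mat_size apples turns → Pre_solution mat_size apples turns → Spec_solution mat_size apples turns (solution mat_size apples turns)

-- ===== LEMMAS AND PROOFS =====
-- proof-side intermediate machine M: one unified time loop with an explicit body set,
-- deque and direction vector; A is proved equal to M, and M equal to B's staged scan
structure BS where
  body : PySem.Set (Int × Int)
  apples : PySem.Set (Int × Int)
  dq : List (Int × Int)
  x : Int
  y : Int
  dx : Int
  dy : Int
  t : Int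

def bDead (n : Int) (s : BS) : Prop :=
  ¬(0 ≤ s.x + s.dx ∧ s.x + s.dx < n ∧ 0 ≤ s.y + s.dy ∧ s.y + s.dy < n) ∨
    (s.x + s.dx, s.y + s.dy) ∈ s.body

def bDeadDec (n : Int) (s : BS) : Decidable (bDead n s) := by unfold bDead; infer_instance

def bStep (s : BS) : BS :=
  let x := s.x + s.dx
  let y := s.y + s.dy
  if (x, y) ∈ s.apples then
    ⟨PySem.Set.add s.body (x, y), PySem.Set.discard s.apples (x, y), s.dq ++ [(x, y)],
     x, y, s.dx, s.dy, s.t + 1⟩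
  else
    match s.dq ++ [(x, y)] with
    | [] => ⟨PySem.Set.add s.body (x, y), s.apples, [], x, y, s.dx, s.dy, s.t + 1⟩
    | c :: rest =>
      ⟨PySem.Set.discard (PySem.Set.add s.body (x, y)) c, s.apples, rest, x, y, s.dx, s.dy, s.t + 1⟩

def turnB (cmd : String) (s : BS) : BS :=
  ⟨s.body, s.apples, s.dq, s.x, s.y,
   if cmd = "D" then s.dy else -s.dy, if cmd = "D" then -s.dx else s.dx, s.t⟩
def loopB (n : Int) (fuel : Nat) (ts : List (Int × String)) (s : BS) : Int :=
  match fuel with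
  | 0 => 0
  | f + 1 =>
    match ts with
    | (tt, cmd) :: restTs =>
      if tt ≤ s.t then loopB n f restTs (turnB cmd s)
      else
        letI := bDeadDec n s
        if bDead n s then s.t + 1 else loopB n f ts (bStep s)
    | [] =>
      letI := bDeadDec n s
      if bDead n s then s.t + 1 else loopB n f [] (bStep s)
-- the simulation relation between A and M: same head/clock/deque; direction vector matches
-- A's table; mat cells are 2 on M's body set, 1 on M's apple set, 0 elsewhere
def SimRel (n : Int) (sA : AS) (sB : BS) : Prop :=
  sA.hx = sB.x ∧ sA.hy = sB.y ∧ sA.time = sB.t ∧ sA.dq = sB.dq ∧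
  sB.dq ≠ [] ∧
  (∀ c ∈ sB.dq, 0 ≤ c.1 ∧ c.1 < n ∧ 0 ≤ c.2 ∧ c.2 < n) ∧
  (∀ c ∈ sB.dq, c ∉ sB.apples) ∧
  (0 ≤ sA.dir ∧ sA.dir < 4) ∧
  sB.dx = PySem.List.pyGetD dxA sA.dir 0 ∧ sB.dy = PySem.List.pyGetD dyA sA.dir 0 ∧
  sA.mat.length = n.toNat ∧ (∀ row ∈ sA.mat, row.length = n.toNat) ∧
  (∀ i j : Int, 0 ≤ i → i < n → 0 ≤ j → j < n →
    cellA sA.mat i j = if (i, j) ∈ sB.body then 2 else if (i, j) ∈ sB.apples then 1 else 0)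

lemma pyGetD_idx {α : Type} (xs : List α) (d : α) (i : Int) (h0 : 0 ≤ i) (h1 : i.toNat < xs.length) :
    PySem.List.pyGetD xs i d = xs[i.toNat] := by
  exact PySem.List.pyGetD_eq_getElem xs d h0 (by omega)

lemma setA_eq (mat : List (List Int)) (i j v : Int) (h0 : 0 ≤ i) (h1 : i.toNat < mat.length) (hj : 0 ≤ j) :
    setA mat i j v = mat.set i.toNat (mat[i.toNat].set j.toNat v) := by
  unfold setA
  rw [PySem.List.pySetD_of_nonneg _ _ h0, PySem.List.pySetD_of_nonneg _ _ hj,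
    pyGetD_idx _ _ _ h0 h1]

lemma setA_length (mat : List (List Int)) (i j v : Int) :
    (setA mat i j v).length = mat.length := by
  unfold setA
  rw [PySem.List.length_pySetD]

lemma setA_rows (n : Int) (mat : List (List Int)) (hlen : mat.length = n.toNat)
    (hrow : ∀ row ∈ mat, row.length = n.toNat) (i j v : Int)
    (hi0 : 0 ≤ i) (hi1 : i < n) (hj0 : 0 ≤ j) :
    ∀ row ∈ setA mat i j v, row.length = n.toNat := by
  intro row hr
  rw [setA_eq mat i j v hi0 (by omega) hj0] at hr
  rcases List.mem_or_eq_of_mem_set hr with h | h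
  · exact hrow _ h
  · subst h
    rw [List.length_set]
    exact hrow _ (by apply List.getElem_mem)

lemma cell_setA (n : Int) (mat : List (List Int)) (hlen : mat.length = n.toNat)
    (hrow : ∀ row ∈ mat, row.length = n.toNat)
    (i j i' j' v : Int) (hi0 : 0 ≤ i) (hi1 : i < n) (hj0 : 0 ≤ j) (hj1 : j < n)
    (hI0 : 0 ≤ i') (hI1 : i' < n) (hJ0 : 0 ≤ j') (hJ1 : j' < n) :
    cellA (setA mat i j v) i' j' = if i' = i ∧ j' = j then v else cellA mat i' j' := by
  have hilen : i.toNat < mat.length := by omega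
  have hIlen : i'.toNat < mat.length := by omega
  have hilenr : (mat[i.toNat]).length = n.toNat := hrow _ (List.getElem_mem _)
  have hIlenr : (mat[i'.toNat]).length = n.toNat := hrow _ (List.getElem_mem _)
  unfold cellA
  rw [setA_eq mat i j v hi0 hilen hj0]
  rw [pyGetD_idx _ _ _ hI0 (by simpa using hIlen), pyGetD_idx _ _ _ hI0 hIlen]
  rw [List.getElem_set]
  by_cases hii : i' = i
  · subst hii
    rw [if_pos (by rfl)]
    rw [pyGetD_idx _ _ _ hJ0 (by rw [List.length_set]; omega)]
    rw [List.getElem_set]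
    by_cases hjj : j' = j
    · subst hjj
      rw [if_pos (by rfl), if_pos ⟨rfl, rfl⟩]
    · rw [if_neg (by omega), if_neg (by tauto), pyGetD_idx _ _ _ hJ0 (by omega)]
  · rw [if_neg (by omega), if_neg (by tauto), pyGetD_idx _ _ _ hJ0 (by omega)]

lemma vec_right (dir : Int) (h0 : 0 ≤ dir) (h1 : dir < 4) :
    (0 ≤ turnRight dir ∧ turnRight dir < 4) ∧
    PySem.List.pyGetD dxA (turnRight dir) 0 = PySem.List.pyGetD dyA dir 0 ∧
    PySem.List.pyGetD dyA (turnRight dir) 0 = -PySem.List.pyGetD dxA dir 0 := by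
  interval_cases dir <;> decide

lemma vec_left (dir : Int) (h0 : 0 ≤ dir) (h1 : dir < 4) :
    (0 ≤ turnLeft dir ∧ turnLeft dir < 4) ∧
    PySem.List.pyGetD dxA (turnLeft dir) 0 = -PySem.List.pyGetD dyA dir 0 ∧
    PySem.List.pyGetD dyA (turnLeft dir) 0 = PySem.List.pyGetD dxA dir 0 := by
  interval_cases dir <;> decide

-- one move: A dies exactly when M dies (returning the same value), else the successors are related
lemma moveA_dead (n : Int) (sA : AS) (sB : BS) (h : SimRel n sA sB) (hd : bDead n sB) :
    moveA n sA = .inl (sB.t + 1) := by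
  obtain ⟨hhx, hhy, ht, hdq, hne, hbnd, hnap, ⟨hd0, hd1⟩, hdx, hdy, hml, hmr, hcell⟩ := h
  unfold moveA
  rw [← hdx, ← hdy, hhx, hhy, ht]
  rw [if_pos]
  rcases hd with hout | hmem
  · by_cases h1 : sB.x + sB.dx < 0
    · exact Or.inl h1
    · by_cases h2 : sB.x + sB.dx ≥ n
      · exact Or.inr (Or.inl h2)
      · by_cases h3 : sB.y + sB.dy < 0
        · exact Or.inr (Or.inr (Or.inl h3))
        · by_cases h4 : sB.y + sB.dy ≥ n
          · exact Or.inr (Or.inr (Or.inr (Or.inl h4)))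
          · exact absurd ⟨by omega, by omega, by omega, by omega⟩ hout
  · by_cases hout : sB.x + sB.dx < 0 ∨ sB.x + sB.dx ≥ n ∨ sB.y + sB.dy < 0 ∨ sB.y + sB.dy ≥ n
    · tauto
    · refine Or.inr (Or.inr (Or.inr (Or.inr ?_)))
      rw [hcell _ _ (by omega) (by omega) (by omega) (by omega), if_pos hmem]

lemma moveA_alive (n : Int) (sA : AS) (sB : BS) (h : SimRel n sA sB) (hd : ¬ bDead n sB) :
    ∃ sA', moveA n sA = .inr sA' ∧ SimRel n sA' (bStep sB) := by
  obtain ⟨hhx, hhy, ht, hdq, hne, hbnd, hnap, ⟨hd0, hd1⟩, hdx, hdy, hml, hmr, hcell⟩ := h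
  unfold bDead at hd
  push Not at hd
  obtain ⟨⟨h1, h2, h3, h4⟩, hnb⟩ := hd
  have hcXY := hcell _ _ h1 h2 h3 h4
  rw [if_neg hnb] at hcXY
  unfold moveA
  rw [← hdx, ← hdy, hhx, hhy]
  rw [if_neg (by
    push Not
    refine ⟨by omega, by omega, by omega, by omega, ?_⟩
    rw [hcXY]; split_ifs <;> omega)]
  by_cases ha : (sB.x + sB.dx, sB.y + sB.dy) ∈ sB.apples
  · rw [if_pos (by rw [hcXY, if_pos ha])]
    have hb : bStep sB =
        ⟨PySem.Set.add sB.body (sB.x + sB.dx, sB.y + sB.dy),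
         PySem.Set.discard sB.apples (sB.x + sB.dx, sB.y + sB.dy),
         sB.dq ++ [(sB.x + sB.dx, sB.y + sB.dy)],
         sB.x + sB.dx, sB.y + sB.dy, sB.dx, sB.dy, sB.t + 1⟩ := by
      simp only [bStep]; rw [if_pos ha]
    refine ⟨_, rfl, ?_⟩
    rw [hb]
    refine ⟨rfl, rfl, by simpa using ht, by simpa using hdq, by simp, ?_, ?_,
      ⟨hd0, hd1⟩, hdx, hdy, by simpa [setA_length] using hml, ?_, ?_⟩
    · intro c hc
      rcases List.mem_append.mp hc with hc | hc
      · exact hbnd c hc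
      · simp at hc; subst hc; exact ⟨h1, h2, h3, h4⟩
    · intro c hc
      rcases List.mem_append.mp hc with hc | hc
      · have := hnap c hc
        simp [PySem.Set.mem_discard]
        tauto
      · simp at hc; subst hc
        simp [PySem.Set.mem_discard]
    · exact setA_rows n sA.mat hml hmr _ _ _ h1 h2 h3
    · intro i j hi0 hi1 hj0 hj1
      rw [cell_setA n sA.mat hml hmr _ _ _ _ 2 h1 h2 h3 h4 hi0 hi1 hj0 hj1]
      by_cases hij : i = sB.x + sB.dx ∧ j = sB.y + sB.dy
      · rw [if_pos hij]
        have hp : (i, j) = (sB.x + sB.dx, sB.y + sB.dy) := by rw [hij.1, hij.2]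
        rw [if_pos (by simp [PySem.Set.mem_add, hp])]
      · rw [if_neg hij, hcell _ _ hi0 hi1 hj0 hj1]
        have hne' : (i, j) ≠ (sB.x + sB.dx, sB.y + sB.dy) := by
          intro hcon
          exact hij ⟨congrArg Prod.fst hcon, congrArg Prod.snd hcon⟩
        simp [PySem.Set.mem_add, PySem.Set.mem_discard, hne']
  · rw [if_neg (by rw [hcXY, if_neg ha]; omega)]
    rcases hq : sB.dq with _ | ⟨⟨tx, ty⟩, dtl⟩
    · exact absurd hq hne
    obtain ⟨htx0, htx1, hty0, hty1⟩ := hbnd (tx, ty) (by rw [hq]; exact List.mem_cons_self)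
    have hta : (tx, ty) ∉ sB.apples := hnap (tx, ty) (by rw [hq]; exact List.mem_cons_self)
    have hb : bStep sB =
        ⟨PySem.Set.discard (PySem.Set.add sB.body (sB.x + sB.dx, sB.y + sB.dy)) (tx, ty),
         sB.apples, dtl ++ [(sB.x + sB.dx, sB.y + sB.dy)],
         sB.x + sB.dx, sB.y + sB.dy, sB.dx, sB.dy, sB.t + 1⟩ := by
      simp only [bStep]; rw [if_neg ha, hq]; rfl
    rw [hdq, hq]
    refine ⟨_, rfl, ?_⟩
    rw [hb]
    refine ⟨rfl, rfl, by simpa using ht, by simp, by simp, ?_, ?_,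
      ⟨hd0, hd1⟩, hdx, hdy, by simpa [setA_length] using hml, ?_, ?_⟩
    · intro c hc
      rcases List.mem_append.mp hc with hc | hc
      · exact hbnd c (by rw [hq]; exact List.mem_cons_of_mem _ hc)
      · simp at hc; subst hc; exact ⟨h1, h2, h3, h4⟩
    · intro c hc
      rcases List.mem_append.mp hc with hc | hc
      · exact hnap c (by rw [hq]; exact List.mem_cons_of_mem _ hc)
      · simp at hc; subst hc; exact ha
    · refine setA_rows n _ (by simpa [setA_length] using hml) ?_ _ _ _ htx0 htx1 hty0
      exact setA_rows n sA.mat hml hmr _ _ _ h1 h2 h3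
    · intro i j hi0 hi1 hj0 hj1
      rw [cell_setA n _ (by simpa [setA_length] using hml)
        (setA_rows n sA.mat hml hmr _ _ _ h1 h2 h3) _ _ _ _ 0 htx0 htx1 hty0 hty1 hi0 hi1 hj0 hj1]
      rw [cell_setA n sA.mat hml hmr _ _ _ _ 2 h1 h2 h3 h4 hi0 hi1 hj0 hj1]
      by_cases hA : i = tx ∧ j = ty
      · rw [if_pos hA]
        have hp : (i, j) = (tx, ty) := by rw [hA.1, hA.2]
        rw [if_neg (by simp [PySem.Set.mem_discard, hp]), if_neg (by rw [hp]; exact hta)]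
      · by_cases hB : i = sB.x + sB.dx ∧ j = sB.y + sB.dy
        · rw [if_neg hA, if_pos hB]
          have hp : (i, j) = (sB.x + sB.dx, sB.y + sB.dy) := by rw [hB.1, hB.2]
          have hne' : (i, j) ≠ (tx, ty) := by
            intro hcon
            exact hA ⟨congrArg Prod.fst hcon, congrArg Prod.snd hcon⟩
          rw [if_pos (by simp [PySem.Set.mem_discard, PySem.Set.mem_add, hp, hp ▸ hne'])]
        · rw [if_neg hA, if_neg hB, hcell _ _ hi0 hi1 hj0 hj1]
          have hne1 : (i, j) ≠ (tx, ty) := by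
            intro hcon
            exact hA ⟨congrArg Prod.fst hcon, congrArg Prod.snd hcon⟩
          have hne2 : (i, j) ≠ (sB.x + sB.dx, sB.y + sB.dy) := by
            intro hcon
            exact hB ⟨congrArg Prod.fst hcon, congrArg Prod.snd hcon⟩
          simp [PySem.Set.mem_add, PySem.Set.mem_discard, hne1, hne2]

lemma rel_turn (n : Int) (sA : AS) (sB : BS) (cmd : String) (h : SimRel n sA sB) :
    SimRel n ⟨sA.mat, sA.dq, sA.hx, sA.hy, sA.time,
           if cmd = "D" then turnRight sA.dir else turnLeft sA.dir⟩ (turnB cmd sB) := by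
  obtain ⟨hhx, hhy, ht, hdq, hne, hbnd, hnap, ⟨hd0, hd1⟩, hdx, hdy, hml, hmr, hcell⟩ := h
  by_cases hc : cmd = "D"
  · obtain ⟨⟨g0, g1⟩, gx, gy⟩ := vec_right sA.dir hd0 hd1
    simp only [turnB, if_pos hc]
    exact ⟨hhx, hhy, ht, hdq, hne, hbnd, hnap, ⟨g0, g1⟩,
      by rw [gx, ← hdy], by rw [gy, ← hdx], hml, hmr, hcell⟩
  · obtain ⟨⟨g0, g1⟩, gx, gy⟩ := vec_left sA.dir hd0 hd1
    simp only [turnB, if_neg hc]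
    exact ⟨hhx, hhy, ht, hdq, hne, hbnd, hnap, ⟨g0, g1⟩,
      by rw [gx, ← hdy], by rw [gy, ← hdx], hml, hmr, hcell⟩

lemma bStep_t (s : BS) : (bStep s).t = s.t + 1 := by
  simp only [bStep]
  split_ifs with h
  · rfl
  · rcases hq : s.dq ++ [(s.x + s.dx, s.y + s.dy)] with _ | ⟨c, r⟩ <;> rfl
lemma trail_eq (n : Int) : ∀ (f : Nat) (sA : AS) (sB : BS), SimRel n sA sB →
    trailA n f sA = loopB n f [] sB := by
  intro f
  induction f with
  | zero => intro sA sB h; rfl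
  | succ f ih =>
    intro sA sB h
    by_cases hd : bDead n sB
    · simp only [trailA, loopB]
      rw [moveA_dead n sA sB h hd, if_pos hd]
    · obtain ⟨sA', hm, hrel⟩ := moveA_alive n sA sB h hd
      simp only [trailA, loopB]
      rw [hm, if_neg hd]
      exact ih sA' _ hrel
lemma turnB_t (cmd : String) (s : BS) : (turnB cmd s).t = s.t := rfl

-- one schedule segment: k moves during which the front turn entry is not yet due
lemma seg_eq (n : Int) : ∀ (k f : Nat) (sA : AS) (sB : BS) (tt : Int) (cmd : String)
    (restTs : List (Int × String)), SimRel n sA sB → sB.t + (k : Int) = tt → 1 ≤ k →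
    (∃ r, innerA n k sA = .inl r ∧ loopB n (k + f) ((tt, cmd) :: restTs) sB = r) ∨
    (∃ sA' sB', innerA n k sA = .inr sA' ∧ SimRel n sA' sB' ∧ sB'.t = tt ∧
      loopB n (k + f) ((tt, cmd) :: restTs) sB = loopB n f ((tt, cmd) :: restTs) sB') := by
  intro k
  induction k with
  | zero => intro f sA sB tt cmd restTs _ _ hk; omega
  | succ k ih =>
    intro f sA sB tt cmd restTs hrel htt _
    have hfuel : k + 1 + f = (k + f) + 1 := by omega
    rw [hfuel]
    have hne : ¬(tt ≤ sB.t) := by push_cast at htt; omega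
    by_cases hd : bDead n sB
    · left
      refine ⟨sB.t + 1, ?_, ?_⟩
      · simp only [innerA]
        rw [moveA_dead n sA sB hrel hd]
      · simp only [loopB]
        rw [if_neg hne, if_pos hd]
    · obtain ⟨sA', hm, hrel'⟩ := moveA_alive n sA sB hrel hd
      have hst : (bStep sB).t = sB.t + 1 := bStep_t sB
      rcases Nat.eq_zero_or_pos k with hk0 | hkpos
      · subst hk0
        right
        refine ⟨sA', bStep sB, ?_, hrel', by push_cast at htt; omega, ?_⟩
        · simp only [innerA]
          rw [hm]
        · simp only [loopB]
          rw [if_neg hne, if_neg hd]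
          norm_num
      · have hih := ih f sA' (bStep sB) tt cmd restTs hrel'
          (by rw [hst]; push_cast at htt ⊢; omega) hkpos
        rcases hih with ⟨r, hA, hB⟩ | ⟨sA'', sB'', hA, hrel'', htt'', hB⟩
        · left
          refine ⟨r, ?_, ?_⟩
          · simp only [innerA]; rw [hm]; exact hA
          · simp only [loopB]; rw [if_neg hne, if_neg hd]; exact hB
        · right
          refine ⟨sA'', sB'', ?_, hrel'', htt'', ?_⟩
          · simp only [innerA]; rw [hm]; exact hA
          · simp only [loopB]; rw [if_neg hne, if_neg hd]; exact hB

-- the final effective time of a schedule (cumulative positive deltas)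
def effFinal : List (List String) → Int → Int → Int
  | [], _, eff => eff
  | T :: rest, pre, eff =>
    let ti := (PySem.Int.ofStr? (PySem.List.pyGetD T 0 "")).getD 0
    effFinal rest ti (if ti > pre then eff + (ti - pre) else eff)

lemma effFinal_mono : ∀ (turns : List (List String)) (pre eff : Int),
    eff ≤ effFinal turns pre eff := by
  intro turns
  induction turns with
  | nil => intro pre eff; exact le_refl _
  | cons T rest ih =>
    intro pre eff
    simp only [effFinal]
    refine le_trans ?_ (ih _ _)
    split_ifs <;> omega

lemma effTs_le_final : ∀ (turns : List (List String)) (pre eff : Int),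
    ∀ p ∈ effTs turns pre eff, p.1 ≤ effFinal turns pre eff := by
  intro turns
  induction turns with
  | nil => intro pre eff p hp; exact absurd hp List.not_mem_nil
  | cons T rest ih =>
    intro pre eff p hp
    simp only [effTs] at hp
    simp only [effFinal]
    rcases List.mem_cons.mp hp with h | h
    · subst h
      exact effFinal_mono rest _ _
    · exact ih _ _ p h

lemma effTs_length : ∀ (turns : List (List String)) (pre eff : Int),
    (effTs turns pre eff).length = turns.length := by
  intro turns
  induction turns with
  | nil => intro pre eff; rfl
  | cons T rest ih => intro pre eff; simp [effTs, ih]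

-- the whole run: A's per-turn segments + trailing loop against M's single loop
lemma main_eq (n : Int) : ∀ (turns : List (List String)) (pre : Int) (sA : AS) (sB : BS),
    SimRel n sA sB →
    loopB n ((effFinal turns pre sB.t - sB.t).toNat + turns.length + n.toNat + 1)
        (effTs turns pre sB.t) sB =
      match outerA n turns pre sA with
      | .inl r => r
      | .inr s => trailA n (n.toNat + 1) s := by
  intro turns
  induction turns with
  | nil =>
    intro pre sA sB hrel
    simp only [effFinal, effTs, List.length_nil, outerA]
    rw [show (sB.t - sB.t).toNat + 0 + n.toNat + 1 = n.toNat + 1 from by omega]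
    exact (trail_eq n _ sA sB hrel).symm
  | cons T rest ih =>
    intro pre sA sB hrel
    have hturned := rel_turn n sA sB (PySem.List.pyGetD T 1 "") hrel
    by_cases hdpos : (PySem.Int.ofStr? (PySem.List.pyGetD T 0 "")).getD 0 > pre
    · -- positive segment of k moves, then the turn entry is eaten
      set ti := (PySem.Int.ofStr? (PySem.List.pyGetD T 0 "")).getD 0 with hti
      set eff' := sB.t + (ti - pre) with heff
      have hmono := effFinal_mono rest ti eff'
      have hF : (effFinal (T :: rest) pre sB.t - sB.t).toNat + (T :: rest).length + n.toNat + 1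
          = (ti - pre).toNat +
            (((effFinal rest ti eff' - eff').toNat + rest.length + n.toNat + 1) + 1) := by
        simp only [effFinal, List.length_cons, ← hti]
        rw [if_pos hdpos, ← heff]
        omega
      have hTs : effTs (T :: rest) pre sB.t
          = (eff', PySem.List.pyGetD T 1 "") :: effTs rest ti eff' := by
        simp only [effTs, ← hti]
        rw [if_pos hdpos, ← heff]
      rw [hF, hTs]
      have hseg := seg_eq n (ti - pre).toNat
        (((effFinal rest ti eff' - eff').toNat + rest.length + n.toNat + 1) + 1)
        sA sB eff' (PySem.List.pyGetD T 1 "") (effTs rest ti eff') hrel (by omega) (by omega)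
      simp only [outerA, ← hti]
      rcases hseg with ⟨r, hA, hB⟩ | ⟨sA', sB', hA, hrel', htt', hB⟩
      · rw [hB, hA]
      · rw [hB, hA]
        simp only [loopB]
        rw [if_pos (by omega)]
        have hrelT := rel_turn n sA' sB' (PySem.List.pyGetD T 1 "") hrel'
        have hih := ih ti ⟨sA'.mat, sA'.dq, sA'.hx, sA'.hy, sA'.time,
            if PySem.List.pyGetD T 1 "" = "D" then turnRight sA'.dir else turnLeft sA'.dir⟩
          (turnB (PySem.List.pyGetD T 1 "") sB') hrelT
        rw [turnB_t, htt'] at hih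
        exact hih
    · -- zero segment: the turn entry is due immediately
      set ti := (PySem.Int.ofStr? (PySem.List.pyGetD T 0 "")).getD 0 with hti
      have hmono := effFinal_mono rest ti sB.t
      have hF : (effFinal (T :: rest) pre sB.t - sB.t).toNat + (T :: rest).length + n.toNat + 1
          = (((effFinal rest ti sB.t - sB.t).toNat + rest.length + n.toNat + 1)) + 1 := by
        simp only [effFinal, List.length_cons, ← hti]
        rw [if_neg hdpos]
        omega
      have hTs : effTs (T :: rest) pre sB.t
          = (sB.t, PySem.List.pyGetD T 1 "") :: effTs rest ti sB.t := by
        simp only [effTs, ← hti]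
        rw [if_neg hdpos]
      rw [hF, hTs]
      simp only [loopB]
      rw [if_pos (le_refl _)]
      simp only [outerA, ← hti]
      rw [show (ti - pre).toNat = 0 from by omega]
      simp only [innerA]
      have hih := ih ti ⟨sA.mat, sA.dq, sA.hx, sA.hy, sA.time,
          if PySem.List.pyGetD T 1 "" = "D" then turnRight sA.dir else turnLeft sA.dir⟩
        (turnB (PySem.List.pyGetD T 1 "") sB) hturned
      rw [turnB_t] at hih
      exact hih
lemma fold_apples (n : Int) : ∀ (l : List (List Int)) (mat : List (List Int)) (S : List (Int × Int)),
    mat.length = n.toNat → (∀ row ∈ mat, row.length = n.toNat) →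
    (∀ a ∈ l, 1 ≤ PySem.List.pyGetD a 0 0 ∧ PySem.List.pyGetD a 0 0 ≤ n ∧
              1 ≤ PySem.List.pyGetD a 1 0 ∧ PySem.List.pyGetD a 1 0 ≤ n) →
    (∀ i j : Int, 0 ≤ i → i < n → 0 ≤ j → j < n →
      cellA mat i j = if (i, j) ∈ S then 1 else 0) →
    ((l.foldl (fun m a => setA m (PySem.List.pyGetD a 0 0 - 1) (PySem.List.pyGetD a 1 0 - 1) 1) mat).length = n.toNat ∧
     (∀ row ∈ l.foldl (fun m a => setA m (PySem.List.pyGetD a 0 0 - 1) (PySem.List.pyGetD a 1 0 - 1) 1) mat, row.length = n.toNat) ∧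
     ∀ i j : Int, 0 ≤ i → i < n → 0 ≤ j → j < n →
       cellA (l.foldl (fun m a => setA m (PySem.List.pyGetD a 0 0 - 1) (PySem.List.pyGetD a 1 0 - 1) 1) mat) i j
         = if (i, j) ∈ S ++ l.map (fun a => (PySem.List.pyGetD a 0 0 - 1, PySem.List.pyGetD a 1 0 - 1)) then 1 else 0) := by
  intro l
  induction l with
  | nil =>
    intro mat S hml hmr _ hcell
    exact ⟨hml, hmr, by simpa using hcell⟩
  | cons a l ih =>
    intro mat S hml hmr hbnd hcell
    obtain ⟨ha1, ha2, ha3, ha4⟩ := hbnd a List.mem_cons_self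
    have hb1 : (0:Int) ≤ PySem.List.pyGetD a 0 0 - 1 := by omega
    have hb2 : PySem.List.pyGetD a 0 0 - 1 < n := by omega
    have hb3 : (0:Int) ≤ PySem.List.pyGetD a 1 0 - 1 := by omega
    have hb4 : PySem.List.pyGetD a 1 0 - 1 < n := by omega
    have hml1 : (setA mat (PySem.List.pyGetD a 0 0 - 1) (PySem.List.pyGetD a 1 0 - 1) 1).length = n.toNat := by
      rw [setA_length]; exact hml
    have hmr1 := setA_rows n mat hml hmr (PySem.List.pyGetD a 0 0 - 1) (PySem.List.pyGetD a 1 0 - 1) 1 hb1 hb2 hb3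
    have hcell1 : ∀ i j : Int, 0 ≤ i → i < n → 0 ≤ j → j < n →
        cellA (setA mat (PySem.List.pyGetD a 0 0 - 1) (PySem.List.pyGetD a 1 0 - 1) 1) i j
          = if (i, j) ∈ S ++ [(PySem.List.pyGetD a 0 0 - 1, PySem.List.pyGetD a 1 0 - 1)] then 1 else 0 := by
      intro i j hi0 hi1 hj0 hj1
      rw [cell_setA n mat hml hmr _ _ _ _ 1 hb1 hb2 hb3 hb4 hi0 hi1 hj0 hj1]
      by_cases hij : i = PySem.List.pyGetD a 0 0 - 1 ∧ j = PySem.List.pyGetD a 1 0 - 1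
      · rw [if_pos hij, if_pos (by simp [hij.1, hij.2])]
      · rw [if_neg hij, hcell _ _ hi0 hi1 hj0 hj1]
        have hne' : (i, j) ≠ (PySem.List.pyGetD a 0 0 - 1, PySem.List.pyGetD a 1 0 - 1) := by
          intro hcon
          exact hij ⟨congrArg Prod.fst hcon, congrArg Prod.snd hcon⟩
        simp [hne']
    have := ih _ (S ++ [(PySem.List.pyGetD a 0 0 - 1, PySem.List.pyGetD a 1 0 - 1)])
      hml1 hmr1 (fun b hb => hbnd b (List.mem_cons_of_mem _ hb)) hcell1
    simp only [List.foldl_cons, List.map_cons]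
    refine ⟨this.1, this.2.1, ?_⟩
    intro i j hi0 hi1 hj0 hj1
    rw [this.2.2 i j hi0 hi1 hj0 hj1]
    simp [List.append_assoc]

lemma rel_init (n : Int) (apples : List (List Int))
    (hn : 1 ≤ n)
    (hap : ∀ a ∈ apples, 2 ≤ a.length ∧
      (1 ≤ PySem.List.pyGetD a 0 0 ∧ PySem.List.pyGetD a 0 0 ≤ n ∧
       1 ≤ PySem.List.pyGetD a 1 0 ∧ PySem.List.pyGetD a 1 0 ≤ n) ∧
      ¬(PySem.List.pyGetD a 0 0 = 1 ∧ PySem.List.pyGetD a 1 0 = 1)) :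
    SimRel n
      ⟨apples.foldl (fun m a =>
          setA m (PySem.List.pyGetD a 0 0 - 1) (PySem.List.pyGetD a 1 0 - 1) 1)
        (List.replicate n.toNat (List.replicate n.toNat 0)), [(0, 0)], 0, 0, 0, 0⟩
      ⟨PySem.Set.empty,
       PySem.Set.ofList (apples.map (fun a =>
         (PySem.List.pyGetD a 0 0 - 1, PySem.List.pyGetD a 1 0 - 1))),
       [(0, 0)], 0, 0, 0, 1, 0⟩ := by
  have hml0 : (List.replicate n.toNat (List.replicate n.toNat (0:Int))).length = n.toNat :=
    List.length_replicate
  have hmr0 : ∀ row ∈ List.replicate n.toNat (List.replicate n.toNat (0:Int)), row.length = n.toNat := by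
    intro row hr
    rw [(List.eq_of_mem_replicate hr : row = _)]
    exact List.length_replicate
  have hcell0 : ∀ i j : Int, 0 ≤ i → i < n → 0 ≤ j → j < n →
      cellA (List.replicate n.toNat (List.replicate n.toNat (0:Int))) i j
        = if (i, j) ∈ ([] : List (Int × Int)) then 1 else 0 := by
    intro i j hi0 hi1 hj0 hj1
    unfold cellA
    rw [pyGetD_idx _ _ _ hi0 (by simpa using (by omega : i.toNat < n.toNat))]
    rw [List.getElem_replicate]
    rw [pyGetD_idx _ _ _ hj0 (by simpa using (by omega : j.toNat < n.toNat))]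
    simp
  have hfold := fold_apples n apples _ [] hml0 hmr0 (fun a ha => (hap a ha).2.1) hcell0
  refine ⟨rfl, rfl, rfl, rfl, by simp, ?_, ?_,
    ⟨by show (0:Int) ≤ 0; decide, by show (0:Int) < 4; decide⟩,
    by show (0:Int) = PySem.List.pyGetD dxA 0 0; decide,
    by show (1:Int) = PySem.List.pyGetD dyA 0 0; decide, hfold.1, hfold.2.1, ?_⟩
  · intro c hc
    simp at hc
    subst hc
    exact ⟨le_refl _, by omega, le_refl _, by omega⟩
  · intro c hc
    simp at hc
    subst hc
    intro hmem
    have := (PySem.Set.mem_ofList _ _).mp hmem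
    obtain ⟨a, hal, heq⟩ := List.mem_map.mp this
    have h1 : PySem.List.pyGetD a 0 0 - 1 = 0 := congrArg Prod.fst heq
    have h2 : PySem.List.pyGetD a 1 0 - 1 = 0 := congrArg Prod.snd heq
    exact (hap a hal).2.2 ⟨by omega, by omega⟩
  · intro i j hi0 hi1 hj0 hj1
    rw [hfold.2.2 i j hi0 hi1 hj0 hj1]
    by_cases hm : (i, j) ∈ apples.map (fun a => (PySem.List.pyGetD a 0 0 - 1, PySem.List.pyGetD a 1 0 - 1))
    · simp [PySem.Set.mem_ofList, hm]
    · simp [PySem.Set.mem_ofList, hm]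
-- A with no turns: the snake goes straight down row 0 and dies at the wall at time n,
-- apples (wherever A's wraparound indexing put them) never matter
lemma mem_pySetD {α : Type} (xs : List α) (i : Int) (v : α) (y : α)
    (hy : y ∈ PySem.List.pySetD xs i v) : y ∈ xs ∨ y = v := by
  unfold PySem.List.pySetD PySem.List.pySet? at hy
  rcases h : PySem.List.pyIdx? xs.length i with _ | k
  · rw [h] at hy
    exact Or.inl hy
  · rw [h] at hy
    simp only [Option.map_some, Option.getD_some] at hy
    rcases List.mem_or_eq_of_mem_set hy with h' | h'
    · exact Or.inl h'
    · exact Or.inr h'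

lemma pyGetD_mem_or {α : Type} (xs : List α) (i : Int) (d : α) :
    PySem.List.pyGetD xs i d ∈ xs ∨ PySem.List.pyGetD xs i d = d := by
  unfold PySem.List.pyGetD PySem.List.pyGet?
  rcases h : PySem.List.pyIdx? xs.length i with _ | k
  · exact Or.inr rfl
  · simp only [Option.bind_some]
    rcases h' : xs[k]? with _ | x
    · exact Or.inr rfl
    · exact Or.inl (by simpa using List.mem_of_getElem? h')

lemma pyIdx?_lt (L : Nat) (i : Int) (k : Nat) (h : PySem.List.pyIdx? L i = some k) : k < L := by
  unfold PySem.List.pyIdx? at h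
  split_ifs at h <;> injection h with h' <;> omega

lemma rows_setA (L : Nat) (mat : List (List Int)) (hr : ∀ row ∈ mat, row.length = L)
    (p q v : Int) : ∀ row ∈ setA mat p q v, row.length = L := by
  intro row hrow
  unfold setA at hrow
  rcases h : PySem.List.pyIdx? mat.length p with _ | k
  · rw [show PySem.List.pySetD mat p (PySem.List.pySetD (PySem.List.pyGetD mat p []) q v) = mat
      from by unfold PySem.List.pySetD PySem.List.pySet?; rw [h]; rfl] at hrow
    exact hr _ hrow
  · rw [show PySem.List.pySetD mat p (PySem.List.pySetD (PySem.List.pyGetD mat p []) q v)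
        = mat.set k (PySem.List.pySetD (PySem.List.pyGetD mat p []) q v)
      from by unfold PySem.List.pySetD PySem.List.pySet?; rw [h]; rfl] at hrow
    rcases List.mem_or_eq_of_mem_set hrow with h' | h'
    · exact hr _ h'
    · subst h'
      rw [PySem.List.length_pySetD]
      have hk := pyIdx?_lt _ _ _ h
      have hrw : PySem.List.pyGetD mat p [] = mat[k] := by
        unfold PySem.List.pyGetD PySem.List.pyGet?
        rw [h]
        simp [List.getElem?_eq_getElem hk]
      rw [hrw]
      exact hr _ (List.getElem_mem _)

lemma fold_len : ∀ (l : List (List Int)) (mat : List (List Int)),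
    (l.foldl (fun m a =>
      setA m (PySem.List.pyGetD a 0 0 - 1) (PySem.List.pyGetD a 1 0 - 1) 1) mat).length
      = mat.length := by
  intro l
  induction l with
  | nil => intro mat; rfl
  | cons a l ih =>
    intro mat
    rw [List.foldl_cons, ih, setA_length]

lemma fold_rows (L : Nat) : ∀ (l : List (List Int)) (mat : List (List Int)),
    (∀ row ∈ mat, row.length = L) →
    ∀ row ∈ l.foldl (fun m a =>
      setA m (PySem.List.pyGetD a 0 0 - 1) (PySem.List.pyGetD a 1 0 - 1) 1) mat,
      row.length = L := by
  intro l
  induction l with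
  | nil => intro mat h; exact h
  | cons a l ih =>
    intro mat h
    exact ih _ (rows_setA L mat h _ _ _)

def All01 (mat : List (List Int)) : Prop := ∀ row ∈ mat, ∀ v ∈ row, v = 0 ∨ v = 1

lemma all01_setA (mat : List (List Int)) (p q : Int) (h : All01 mat) :
    All01 (setA mat p q 1) := by
  intro row hrow
  rcases mem_pySetD _ _ _ _ hrow with h' | h'
  · exact h _ h'
  · subst h'
    intro v hv
    rcases mem_pySetD _ _ _ _ hv with h'' | h''
    · rcases pyGetD_mem_or mat p ([] : List Int) with h3 | h3
      · exact h _ h3 _ h''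
      · rw [h3] at h''
        exact absurd h'' List.not_mem_nil
    · exact Or.inr h''

lemma all01_fold : ∀ (l : List (List Int)) (mat : List (List Int)), All01 mat →
    All01 (l.foldl (fun m a =>
      setA m (PySem.List.pyGetD a 0 0 - 1) (PySem.List.pyGetD a 1 0 - 1) 1) mat) := by
  intro l
  induction l with
  | nil => intro mat h; exact h
  | cons a l ih =>
    intro mat h
    exact ih _ (all01_setA _ _ _ h)

lemma cell01 (mat : List (List Int)) (h : All01 mat) (i j : Int) :
    cellA mat i j = 0 ∨ cellA mat i j = 1 := by
  unfold cellA
  rcases pyGetD_mem_or mat i ([] : List Int) with h1 | h1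
  · rcases pyGetD_mem_or (PySem.List.pyGetD mat i []) j (0 : Int) with h2 | h2
    · exact h _ h1 _ h2
    · exact Or.inl h2
  · rw [h1]
    rcases pyGetD_mem_or ([] : List Int) j (0 : Int) with h2 | h2
    · exact absurd h2 List.not_mem_nil
    · exact Or.inl h2

def RowInvA (n c : Int) (s : AS) : Prop :=
  s.hx = 0 ∧ s.hy = c ∧ s.time = c ∧ s.dir = 0 ∧ 0 ≤ c ∧ c < n ∧
  s.mat.length = n.toNat ∧ (∀ row ∈ s.mat, row.length = n.toNat) ∧
  (∀ j : Int, c < j → j < n → cellA s.mat 0 j ≠ 2) ∧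
  (∀ cc ∈ s.dq, 0 ≤ cc.1 ∧ cc.1 < n ∧ 0 ≤ cc.2 ∧ cc.2 < n)

lemma moveA_row_dead (n c : Int) (s : AS) (h : RowInvA n c s) (hend : n ≤ c + 1) :
    moveA n s = .inl (s.time + 1) := by
  obtain ⟨hx, hy, ht, hdir, hc0, hc1, hml, hmr, hcells, hdq⟩ := h
  unfold moveA
  rw [hx, hy, hdir]
  rw [show PySem.List.pyGetD dxA (0:Int) 0 = 0 from by decide,
    show PySem.List.pyGetD dyA (0:Int) 0 = 1 from by decide]
  rw [if_pos (Or.inr (Or.inr (Or.inr (Or.inl (by omega)))))]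

lemma moveA_row_alive (n c : Int) (hn : 1 ≤ n) (s : AS) (h : RowInvA n c s) (hend : c + 1 < n) :
    ∃ s', moveA n s = .inr s' ∧ RowInvA n (c + 1) s' := by
  obtain ⟨hx, hy, ht, hdir, hc0, hc1, hml, hmr, hcells, hdq⟩ := h
  have hcell := hcells (c + 1) (by omega) (by omega)
  unfold moveA
  rw [hx, hy, hdir]
  rw [show PySem.List.pyGetD dxA (0:Int) 0 = 0 from by decide,
    show PySem.List.pyGetD dyA (0:Int) 0 = 1 from by decide]
  rw [if_neg (by
    push Not
    exact ⟨by omega, by omega, by omega, by omega, hcell⟩)]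
  have hb1 : (0:Int) ≤ 0 + 0 := by omega
  have hb2 : (0:Int) + 0 < n := by omega
  have hcnew : ∀ j : Int, c + 1 < j → j < n →
      cellA (setA s.mat (0 + 0) (c + 1) 2) 0 j ≠ 2 := by
    intro j hj0 hj1
    rw [cell_setA n s.mat hml hmr _ _ _ _ 2 hb1 hb2 (by omega) hend (by omega) (by omega)
      (by omega) hj1]
    rw [if_neg (by rintro ⟨-, h2⟩; omega)]
    exact hcells j (by omega) hj1
  have hmlnew : (setA s.mat (0 + 0) (c + 1) 2).length = n.toNat := by
    rw [setA_length]; exact hml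
  have hmrnew := rows_setA n.toNat s.mat hmr (0 + 0) (c + 1) 2
  by_cases h1 : cellA s.mat (0 + 0) (c + 1) = 1
  · rw [if_pos h1]
    refine ⟨_, rfl, by show (0:Int) + 0 = 0; norm_num, rfl, ?_, rfl, by omega, by omega,
      hmlnew, hmrnew, hcnew, ?_⟩
    · show s.time + 1 = c + 1
      omega
    · intro cc hcc
      rcases List.mem_append.mp hcc with h' | h'
      · exact hdq cc h'
      · simp at h'
        subst h'
        exact ⟨by omega, by omega, by omega, by omega⟩
  · rw [if_neg h1]
    have hbnd' : ∀ cc ∈ s.dq ++ [((0:Int) + 0, c + 1)],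
        0 ≤ cc.1 ∧ cc.1 < n ∧ 0 ≤ cc.2 ∧ cc.2 < n := by
      intro cc hcc
      rcases List.mem_append.mp hcc with h' | h'
      · exact hdq cc h'
      · simp at h'
        subst h'
        exact ⟨by omega, by omega, by omega, by omega⟩
    rcases hq : s.dq ++ [((0:Int) + 0, c + 1)] with _ | ⟨⟨tx, ty⟩, dtl⟩
    · simp at hq
    obtain ⟨htx0, htx1, hty0, hty1⟩ := hbnd' (tx, ty) (by rw [hq]; exact List.mem_cons_self)
    refine ⟨_, rfl, by show (0:Int) + 0 = 0; norm_num, rfl, ?_, rfl, by omega, by omega,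
      ?_, ?_, ?_, ?_⟩
    · show s.time + 1 = c + 1
      omega
    · rw [setA_length]; exact hmlnew
    · exact rows_setA n.toNat _ hmrnew tx ty 0
    · intro j hj0 hj1
      rw [cell_setA n _ hmlnew hmrnew _ _ _ _ 0 htx0 htx1 hty0 hty1 (by omega) (by omega)
        (by omega) hj1]
      split_ifs with hcase
      · omega
      · exact hcnew j hj0 hj1
    · intro cc hcc
      exact hbnd' cc (by rw [hq]; exact List.mem_cons_of_mem _ hcc)

lemma rowA (n : Int) (hn : 1 ≤ n) : ∀ (f : Nat) (c : Int) (s : AS), RowInvA n c s →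
    (n - c).toNat ≤ f → trailA n f s = n := by
  intro f
  induction f with
  | zero =>
    intro c s hInv hf
    obtain ⟨-, -, -, -, -, hc1, -⟩ := hInv
    omega
  | succ f ih =>
    intro c s hInv hf
    by_cases hend : n ≤ c + 1
    · simp only [trailA]
      rw [moveA_row_dead n c s hInv hend]
      obtain ⟨-, -, ht, -, -, hc1, -⟩ := hInv
      show s.time + 1 = n
      omega
    · have hc1 : c < n := hInv.2.2.2.2.2.1
      obtain ⟨s', hm, hInv'⟩ := moveA_row_alive n c hn s hInv (by omega)
      simp only [trailA]
      rw [hm]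
      exact ih (c + 1) s' hInv' (by omega)

lemma sol_noturn (n : Int) (apples : List (List Int)) (hn : 1 ≤ n) :
    solution n apples [] = n := by
  unfold solution
  dsimp only
  simp only [outerA]
  refine rowA n hn (n.toNat + 1) 0 _ ⟨rfl, rfl, rfl, rfl, by omega, by omega, ?_, ?_, ?_, ?_⟩
    (by omega)
  · rw [fold_len]
    exact List.length_replicate
  · refine fold_rows n.toNat apples _ ?_
    intro row hrow
    have hr' := List.eq_of_mem_replicate hrow
    subst hr'
    exact List.length_replicate
  · intro j hj0 hj1
    dsimp only
    have h01 := cell01 _ (all01_fold apples (List.replicate n.toNat (List.replicate n.toNat 0)) (by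
      intro row hrow v hv
      have hr' := List.eq_of_mem_replicate hrow
      subst hr'
      exact Or.inl (List.eq_of_mem_replicate hv))) 0 j
    omega
  · intro cc hcc
    simp at hcc
    subst hcc
    exact ⟨by omega, by omega, by omega, by omega⟩

-- the degenerate board: every first move leaves a non-positive board, A returns 1
lemma turn_range (d : Int) (h0 : 0 ≤ d) (h1 : d < 4) (cmd : String) :
    0 ≤ (if cmd = "D" then turnRight d else turnLeft d) ∧
      (if cmd = "D" then turnRight d else turnLeft d) < 4 := by
  unfold turnRight turnLeft
  split_ifs <;> omega

lemma moveA_small (n : Int) (s : AS) (hn : n ≤ 0) (hx : s.hx = 0) (hy : s.hy = 0)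
    (h0 : 0 ≤ s.dir) (h1 : s.dir < 4) : moveA n s = .inl (s.time + 1) := by
  unfold moveA
  rw [hx, hy, if_pos]
  have h4 : s.dir = 0 ∨ s.dir = 1 ∨ s.dir = 2 ∨ s.dir = 3 := by omega
  rcases h4 with h | h | h | h <;> rw [h]
  · rw [show PySem.List.pyGetD dyA (0:Int) 0 = 1 from by decide]
    exact Or.inr (Or.inr (Or.inr (Or.inl (by omega))))
  · rw [show PySem.List.pyGetD dxA (1:Int) 0 = 1 from by decide]
    exact Or.inr (Or.inl (by omega))
  · rw [show PySem.List.pyGetD dyA (2:Int) 0 = -1 from by decide]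
    exact Or.inr (Or.inr (Or.inl (by omega)))
  · rw [show PySem.List.pyGetD dxA (3:Int) 0 = -1 from by decide]
    exact Or.inl (by omega)

lemma deg_run (n : Int) (hn : n ≤ 0) : ∀ (turns : List (List String)) (preT : Int) (s : AS),
    s.hx = 0 → s.hy = 0 → s.time = 0 → 0 ≤ s.dir → s.dir < 4 →
    (match outerA n turns preT s with
     | .inl r => r
     | .inr s' => trailA n (n.toNat + 1) s') = 1 := by
  intro turns
  induction turns with
  | nil =>
    intro preT s hx hy ht h0 h1
    simp only [outerA]
    rw [show n.toNat + 1 = 0 + 1 from by omega]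
    simp only [trailA]
    rw [moveA_small n s hn hx hy h0 h1, ht]
    norm_num
  | cons T rest ih =>
    intro preT s hx hy ht h0 h1
    simp only [outerA]
    rcases hk : ((PySem.Int.ofStr? (PySem.List.pyGetD T 0 "")).getD 0 - preT).toNat with _ | m
    · simp only [innerA]
      exact ih _ _ hx hy ht (turn_range s.dir h0 h1 _).1 (turn_range s.dir h0 h1 _).2
    · simp only [innerA]
      rw [moveA_small n s hn hx hy h0 h1, ht]
      norm_num
-- ==== relating the intermediate machine M to B's staged generate-then-scan ====

def InBp (n : Int) (c : Int × Int) : Prop := 0 ≤ c.1 ∧ c.1 < n ∧ 0 ≤ c.2 ∧ c.2 < n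

-- a trajectory that ends with an off-board cell
def EndsOut (n : Int) (l : List (Int × Int)) : Prop :=
  ∃ c, l.getLast? = some c ∧ ¬ InBp n c

lemma getD_eq_getElem {α : Type} (l : List α) (i : Nat) (d : α) (h : i < l.length) :
    l.getD i d = l[i] := by
  rw [List.getD_eq_getElem?_getD, List.getElem?_eq_getElem h]
  rfl

lemma gen_acc (n : Int) :
    ∀ (f : Nat) (t x y dx dy : Int) (ts : List (Int × String)) (acc : List (Int × Int)),
      gen n f t x y dx dy ts acc = acc ++ gen n f t x y dx dy ts [] := by
  intro f
  induction f with
  | zero => intro t x y dx dy ts acc; simp [gen]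
  | succ f ih =>
    intro t x y dx dy ts acc
    simp only [gen]
    by_cases hOut : ¬(0 ≤ x + (eatA ts t dx dy).1.1 ∧ x + (eatA ts t dx dy).1.1 < n ∧
        0 ≤ y + (eatA ts t dx dy).1.2 ∧ y + (eatA ts t dx dy).1.2 < n)
    · rw [if_pos hOut, if_pos hOut]
      simp
    · rw [if_neg hOut, if_neg hOut,
        ih _ _ _ _ _ _ (acc ++ [(x + (eatA ts t dx dy).1.1, y + (eatA ts t dx dy).1.2)]),
        ih _ _ _ _ _ _ ([] ++ [(x + (eatA ts t dx dy).1.1, y + (eatA ts t dx dy).1.2)])]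
      simp

lemma lastAppend {a : Type} (l1 l2 : List a) (h : l2 ≠ []) :
    (l1 ++ l2).getLast? = l2.getLast? := by
  rw [List.getLast?_append]
  rcases hl : l2.getLast? with _ | v
  · rw [List.getLast?_eq_none_iff] at hl
    exact absurd hl h
  · rfl

lemma init_le_foldl_max : ∀ (l : List Int) (a : Int), a ≤ l.foldl max a := by
  intro l
  induction l with
  | nil => intro a; simp
  | cons b r ih =>
    intro a
    calc a ≤ max a b := le_max_left a b
      _ ≤ (b :: r).foldl max a := by simpa using ih (max a b)

lemma mem_le_foldl_max : ∀ (l : List Int) (a b : Int), b ∈ l → b ≤ l.foldl max a := by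
  intro l
  induction l with
  | nil => intro a b hb; exact absurd hb List.not_mem_nil
  | cons c r ih =>
    intro a b hb
    rcases List.mem_cons.mp hb with h | h
    · subst h
      calc b ≤ max a b := le_max_right a b
        _ ≤ r.foldl max (max a b) := init_le_foldl_max r (max a b)
        _ = (b :: r).foldl max a := by simp
    · simpa using ih (max a c) b h

lemma foldl_max_le : ∀ (l : List Int) (a c : Int), (∀ b ∈ l, b ≤ c) → a ≤ c →
    l.foldl max a ≤ c := by
  intro l
  induction l with
  | nil => intro a c _ h; simpa
  | cons b r ih =>
    intro a c hb ha
    simp only [List.foldl_cons]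
    exact ih _ c (fun x hx => hb x (List.mem_cons_of_mem _ hx))
      (max_le ha (hb b List.mem_cons_self))

-- the four unit directions; preserved by turns, hence by eatA
def DirOK (dx dy : Int) : Prop :=
  (dx = 0 ∧ dy = 1) ∨ (dx = 1 ∧ dy = 0) ∨ (dx = 0 ∧ dy = -1) ∨ (dx = -1 ∧ dy = 0)

lemma dirOK_right (dx dy : Int) (h : DirOK dx dy) : DirOK dy (-dx) := by
  rcases h with ⟨h1, h2⟩ | ⟨h1, h2⟩ | ⟨h1, h2⟩ | ⟨h1, h2⟩ <;> subst h1 <;> subst h2 <;>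
    simp [DirOK]

lemma dirOK_left (dx dy : Int) (h : DirOK dx dy) : DirOK (-dy) dx := by
  rcases h with ⟨h1, h2⟩ | ⟨h1, h2⟩ | ⟨h1, h2⟩ | ⟨h1, h2⟩ <;> subst h1 <;> subst h2 <;>
    simp [DirOK]

lemma eatA_dirOK : ∀ (ts : List (Int × String)) (t dx dy : Int), DirOK dx dy →
    DirOK (eatA ts t dx dy).1.1 (eatA ts t dx dy).1.2 := by
  intro ts
  induction ts with
  | nil => intro t dx dy h; exact h
  | cons p rest ih =>
    rcases p with ⟨tt, cmd⟩
    intro t dx dy h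
    simp only [eatA]
    split_ifs with h1 h2
    · exact ih t _ _ (dirOK_right dx dy h)
    · exact ih t _ _ (dirOK_left dx dy h)
    · exact h

lemma eatA_all : ∀ (ts : List (Int × String)) (t dx dy : Int), (∀ p ∈ ts, p.1 ≤ t) →
    (eatA ts t dx dy).2 = [] := by
  intro ts
  induction ts with
  | nil => intro t dx dy _; rfl
  | cons p rest ih =>
    rcases p with ⟨tt, cmd⟩
    intro t dx dy h
    have h1 := h (tt, cmd) List.mem_cons_self
    simp only [eatA]
    rw [if_pos h1]
    split_ifs <;> exact ih t _ _ (fun p hp => h p (List.mem_cons_of_mem _ hp))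

lemma eatA_sub : ∀ (ts : List (Int × String)) (t dx dy : Int),
    ∀ p ∈ (eatA ts t dx dy).2, p ∈ ts := by
  intro ts
  induction ts with
  | nil => intro t dx dy p hp; exact hp
  | cons q rest ih =>
    rcases q with ⟨tt, cmd⟩
    intro t dx dy p hp
    simp only [eatA] at hp
    split_ifs at hp with h1 h2
    · exact List.mem_cons_of_mem _ (ih t _ _ p hp)
    · exact List.mem_cons_of_mem _ (ih t _ _ p hp)
    · exact hp

lemma eatA_front : ∀ (ts : List (Int × String)) (t dx dy tt' : Int) (cmd' : String)
    (rest' : List (Int × String)), (eatA ts t dx dy).2 = (tt', cmd') :: rest' → t < tt' := by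
  intro ts
  induction ts with
  | nil => intro t dx dy tt' cmd' rest' h; cases h
  | cons q rest ih =>
    rcases q with ⟨tt, cmd⟩
    intro t dx dy tt' cmd' rest' h
    simp only [eatA] at h
    split_ifs at h with h1 h2
    · exact ih t _ _ _ _ _ h
    · exact ih t _ _ _ _ _ h
    · injection h with h3 h4
      injection h3 with h5 h6
      omega

-- steps left before a straight-moving head leaves the board
def strMeas (n dx dy x y : Int) : Nat :=
  (if dx = 0 then (if dy = 1 then n - y else y + 1) else (if dx = 1 then n - x else x + 1)).toNat

lemma strMeas_pos (n dx dy x y : Int) (hd : DirOK dx dy) (hin : InBp n (x, y)) :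
    1 ≤ strMeas n dx dy x y := by
  obtain ⟨h1, h2, h3, h4⟩ := hin
  simp only at h1 h2 h3 h4
  unfold strMeas
  rcases hd with ⟨e1, e2⟩ | ⟨e1, e2⟩ | ⟨e1, e2⟩ | ⟨e1, e2⟩ <;> subst e1 <;> subst e2 <;>
    simp <;> omega

lemma strMeas_le (n dx dy x y : Int) (hd : DirOK dx dy) (hin : InBp n (x, y)) :
    strMeas n dx dy x y ≤ n.toNat := by
  obtain ⟨h1, h2, h3, h4⟩ := hin
  simp only at h1 h2 h3 h4
  unfold strMeas
  rcases hd with ⟨e1, e2⟩ | ⟨e1, e2⟩ | ⟨e1, e2⟩ | ⟨e1, e2⟩ <;> subst e1 <;> subst e2 <;>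
    simp <;> omega

lemma strMeas_dec (n dx dy x y : Int) (hd : DirOK dx dy) (hin : InBp n (x, y))
    (hin' : InBp n (x + dx, y + dy)) :
    strMeas n dx dy (x + dx) (y + dy) + 1 = strMeas n dx dy x y := by
  obtain ⟨g1, g2, g3, g4⟩ := hin
  obtain ⟨k1, k2, k3, k4⟩ := hin'
  simp only at g1 g2 g3 g4 k1 k2 k3 k4
  unfold strMeas
  rcases hd with ⟨e1, e2⟩ | ⟨e1, e2⟩ | ⟨e1, e2⟩ | ⟨e1, e2⟩ <;> subst e1 <;> subst e2 <;>
    simp <;> omega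

lemma gen_straight (n : Int) :
    ∀ (f : Nat) (t x y dx dy : Int), DirOK dx dy → InBp n (x, y) →
      strMeas n dx dy x y ≤ f →
      EndsOut n (gen n f t x y dx dy [] []) ∧
        (gen n f t x y dx dy [] []).length ≤ strMeas n dx dy x y := by
  intro f
  induction f with
  | zero =>
    intro t x y dx dy hd hin hm
    have := strMeas_pos n dx dy x y hd hin
    omega
  | succ f ih =>
    intro t x y dx dy hd hin hm
    simp only [gen, eatA]
    by_cases hOut : ¬(0 ≤ x + dx ∧ x + dx < n ∧ 0 ≤ y + dy ∧ y + dy < n)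
    · rw [if_pos hOut]
      refine ⟨⟨(x + dx, y + dy), by simp, by simpa [InBp] using hOut⟩, ?_⟩
      have := strMeas_pos n dx dy x y hd hin
      simpa using this
    · rw [if_neg hOut]
      push Not at hOut
      have hin' : InBp n (x + dx, y + dy) := ⟨hOut.1, hOut.2.1, hOut.2.2.1, hOut.2.2.2⟩
      have hdec := strMeas_dec n dx dy x y hd hin hin'
      obtain ⟨hEnds, hLen⟩ := ih (t + 1) (x + dx) (y + dy) dx dy hd hin' (by omega)
      obtain ⟨c, hc1, hc2⟩ := hEnds
      have hne : gen n f (t + 1) (x + dx) (y + dy) dx dy [] [] ≠ [] := by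
        intro hcon
        rw [hcon] at hc1
        simp at hc1
      rw [gen_acc n f (t + 1) (x + dx) (y + dy) dx dy [] ([] ++ [(x + dx, y + dy)])]
      refine ⟨⟨c, ?_, hc2⟩, ?_⟩
      · simp only [List.nil_append]
        rw [lastAppend _ _ hne]
        exact hc1
      · simp only [List.nil_append, List.length_append, List.length_cons, List.length_nil]
        omega

lemma gen_phase (n T : Int) :
    ∀ (p f : Nat) (t x y dx dy : Int) (ts : List (Int × String)),
      (T - t).toNat = p → (∀ q ∈ ts, q.1 ≤ T) → DirOK dx dy → InBp n (x, y) →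
      p + n.toNat + 1 ≤ f →
      EndsOut n (gen n f t x y dx dy ts []) ∧
        (gen n f t x y dx dy ts []).length ≤ p + n.toNat := by
  intro p
  induction p with
  | zero =>
    intro f t x y dx dy ts hp hq hd hin hf
    rcases f with _ | f
    · omega
    simp only [gen]
    have hd2 : (eatA ts t dx dy).2 = [] := eatA_all ts t dx dy (fun q hqm => by
      have := hq q hqm
      omega)
    have hdOK := eatA_dirOK ts t dx dy hd
    by_cases hOut : ¬(0 ≤ x + (eatA ts t dx dy).1.1 ∧ x + (eatA ts t dx dy).1.1 < n ∧
        0 ≤ y + (eatA ts t dx dy).1.2 ∧ y + (eatA ts t dx dy).1.2 < n)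
    · rw [if_pos hOut]
      refine ⟨⟨(x + (eatA ts t dx dy).1.1, y + (eatA ts t dx dy).1.2), by simp,
        by simpa [InBp] using hOut⟩, ?_⟩
      have hnp : 1 ≤ n.toNat := by
        obtain ⟨h1, h2, -⟩ := hin
        simp only at h1 h2
        omega
      simpa using hnp
    · rw [if_neg hOut, hd2]
      push Not at hOut
      have hin' : InBp n (x + (eatA ts t dx dy).1.1, y + (eatA ts t dx dy).1.2) :=
        ⟨hOut.1, hOut.2.1, hOut.2.2.1, hOut.2.2.2⟩
      have hdec := strMeas_dec n (eatA ts t dx dy).1.1 (eatA ts t dx dy).1.2 x y hdOK hin hin'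
      have hle := strMeas_le n (eatA ts t dx dy).1.1 (eatA ts t dx dy).1.2 x y hdOK hin
      obtain ⟨hEnds, hLen⟩ := gen_straight n f (t + 1)
        (x + (eatA ts t dx dy).1.1) (y + (eatA ts t dx dy).1.2)
        (eatA ts t dx dy).1.1 (eatA ts t dx dy).1.2 hdOK hin' (by omega)
      obtain ⟨c, hc1, hc2⟩ := hEnds
      have hne : gen n f (t + 1) (x + (eatA ts t dx dy).1.1) (y + (eatA ts t dx dy).1.2)
          (eatA ts t dx dy).1.1 (eatA ts t dx dy).1.2 [] [] ≠ [] := by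
        intro hcon
        rw [hcon] at hc1
        simp at hc1
      rw [gen_acc]
      refine ⟨⟨c, ?_, hc2⟩, ?_⟩
      · simp only [List.nil_append]
        rw [lastAppend _ _ hne]
        exact hc1
      · simp only [List.nil_append, List.length_append, List.length_cons, List.length_nil]
        omega
  | succ p ih =>
    intro f t x y dx dy ts hp hq hd hin hf
    rcases f with _ | f
    · omega
    simp only [gen]
    have hdOK := eatA_dirOK ts t dx dy hd
    by_cases hOut : ¬(0 ≤ x + (eatA ts t dx dy).1.1 ∧ x + (eatA ts t dx dy).1.1 < n ∧
        0 ≤ y + (eatA ts t dx dy).1.2 ∧ y + (eatA ts t dx dy).1.2 < n)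
    · rw [if_pos hOut]
      exact ⟨⟨(x + (eatA ts t dx dy).1.1, y + (eatA ts t dx dy).1.2), by simp,
        by simpa [InBp] using hOut⟩, by simp; omega⟩
    · rw [if_neg hOut]
      push Not at hOut
      have hin' : InBp n (x + (eatA ts t dx dy).1.1, y + (eatA ts t dx dy).1.2) :=
        ⟨hOut.1, hOut.2.1, hOut.2.2.1, hOut.2.2.2⟩
      obtain ⟨hEnds, hLen⟩ := ih f (t + 1) (x + (eatA ts t dx dy).1.1)
        (y + (eatA ts t dx dy).1.2) (eatA ts t dx dy).1.1 (eatA ts t dx dy).1.2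
        (eatA ts t dx dy).2 (by omega)
        (fun q hqm => hq q (eatA_sub ts t dx dy q hqm)) hdOK hin' (by omega)
      obtain ⟨c, hc1, hc2⟩ := hEnds
      have hne : gen n f (t + 1) (x + (eatA ts t dx dy).1.1) (y + (eatA ts t dx dy).1.2)
          (eatA ts t dx dy).1.1 (eatA ts t dx dy).1.2 (eatA ts t dx dy).2 [] ≠ [] := by
        intro hcon
        rw [hcon] at hc1
        simp at hc1
      rw [gen_acc]
      refine ⟨⟨c, ?_, hc2⟩, ?_⟩
      · simp only [List.nil_append]
        rw [lastAppend _ _ hne]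
        exact hc1
      · simp only [List.nil_append, List.length_append, List.length_cons, List.length_nil]
        omega

lemma getD_drop_head {α : Type} (l : List α) (t : Nat) (z : α) (zs : List α) (d : α)
    (h : l.drop t = z :: zs) : l.getD t d = z := by
  have h0 : l[t]? = some z := by
    have h1 : (l.drop t)[0]? = l[t + 0]? := List.getElem?_drop
    rw [h] at h1
    simpa using h1.symm
  rw [List.getD_eq_getElem?_getD, h0]
  rfl

lemma getD_take {α : Type} (l : List α) (t m : Nat) (d : α) (h : m < t) :
    (l.take t).getD m d = l.getD m d := by
  rw [List.getD_eq_getElem?_getD, List.getD_eq_getElem?_getD, List.getElem?_take_of_lt h]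

lemma bStep_x (s : BS) : (bStep s).x = s.x + s.dx := by
  simp only [bStep]
  split_ifs with h
  · rfl
  · rcases hq : s.dq ++ [(s.x + s.dx, s.y + s.dy)] with _ | ⟨c, r⟩ <;> rfl

lemma bStep_y (s : BS) : (bStep s).y = s.y + s.dy := by
  simp only [bStep]
  split_ifs with h
  · rfl
  · rcases hq : s.dq ++ [(s.x + s.dx, s.y + s.dy)] with _ | ⟨c, r⟩ <;> rfl

lemma bStep_dx (s : BS) : (bStep s).dx = s.dx := by
  simp only [bStep]
  split_ifs with h
  · rfl
  · rcases hq : s.dq ++ [(s.x + s.dx, s.y + s.dy)] with _ | ⟨c, r⟩ <;> rfl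

lemma bStep_dy (s : BS) : (bStep s).dy = s.dy := by
  simp only [bStep]
  split_ifs with h
  · rfl
  · rcases hq : s.dq ++ [(s.x + s.dx, s.y + s.dy)] with _ | ⟨c, r⟩ <;> rfl

-- M's leading due-turn eats compute exactly eatA on the direction vector
lemma loopB_eat (n : Int) : ∀ (ts : List (Int × String)) (body apples : PySem.Set (Int × Int))
    (dq : List (Int × Int)) (x y dx dy t : Int) (d' : Int × Int) (ts' : List (Int × String)),
    eatA ts t dx dy = (d', ts') →
    ∃ e, e + ts'.length = ts.length ∧ ∀ f, loopB n (e + f) ts ⟨body, apples, dq, x, y, dx, dy, t⟩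
      = loopB n f ts' ⟨body, apples, dq, x, y, d'.1, d'.2, t⟩ := by
  intro ts
  induction ts with
  | nil =>
    intro body apples dq x y dx dy t d' ts' h
    simp only [eatA] at h
    injection h with h1 h2
    subst h1
    subst h2
    exact ⟨0, by simp, fun f => by norm_num⟩
  | cons q rest ih =>
    rcases q with ⟨tt, cmd⟩
    intro body apples dq x y dx dy t d' ts' h
    simp only [eatA] at h
    by_cases hle : tt ≤ t
    · rw [if_pos hle] at h
      by_cases hc : cmd = "D"
      · rw [if_pos hc] at h
        obtain ⟨e, he, hf⟩ := ih body apples dq x y dy (-dx) t d' ts' h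
        refine ⟨e + 1, by simp only [List.length_cons]; omega, ?_⟩
        intro f
        rw [show e + 1 + f = (e + f) + 1 from by omega]
        simp only [loopB]
        rw [if_pos hle,
          show turnB cmd ⟨body, apples, dq, x, y, dx, dy, t⟩
            = ⟨body, apples, dq, x, y, dy, -dx, t⟩ from by simp [turnB, hc]]
        exact hf f
      · rw [if_neg hc] at h
        obtain ⟨e, he, hf⟩ := ih body apples dq x y (-dy) dx t d' ts' h
        refine ⟨e + 1, by simp only [List.length_cons]; omega, ?_⟩
        intro f
        rw [show e + 1 + f = (e + f) + 1 from by omega]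
        simp only [loopB]
        rw [if_pos hle,
          show turnB cmd ⟨body, apples, dq, x, y, dx, dy, t⟩
            = ⟨body, apples, dq, x, y, -dy, dx, t⟩ from by simp [turnB, hc]]
        exact hf f
    · rw [if_neg hle] at h
      injection h with h1 h2
      subst h1
      subst h2
      exact ⟨0, by omega, fun f => by norm_num⟩
-- the main simulation: M's unified loop computes exactly B's scan over the fixed trajectory
lemma loopB_eq_scanB (n : Int) (path : List (Int × Int)) :
    ∀ (k fM : Nat) (rts : List (Int × String)) (sB : BS) (t : Nat),
      k + rts.length ≤ fM →
      (t : Int) = sB.t + 1 →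
      1 ≤ sB.dq.length → sB.dq.length ≤ t →
      t + k = path.length →
      sB.dq = (path.take t).drop (t - sB.dq.length) →
      (∃ f, path.drop t = gen n f sB.t sB.x sB.y sB.dx sB.dy rts []) →
      EndsOut n (path.drop t) →
      loopB n fM rts sB = scanB n path k t sB.body sB.apples sB.dq.length := by
  intro k
  induction k with
  | zero =>
    intro fM rts sB t hkf ht hL1 hLt hlen hdq hgen hEnds
    obtain ⟨c, hc, -⟩ := hEnds
    rw [List.drop_eq_nil_of_le (by omega)] at hc
    simp at hc
  | succ k ih =>
    intro fM rts sB t hkf ht hL1 hLt hlen hdq hgen hEnds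
    obtain ⟨Sb, Sa, Sq, Sx, Sy, Sdx, Sdy, St⟩ := sB
    simp only at ht hL1 hLt hdq hgen ⊢
    obtain ⟨cl, hcl, hclOut⟩ := hEnds
    have hdne : path.drop t ≠ [] := fun hcon => by rw [hcon] at hcl; simp at hcl
    have htlt : t < path.length := by
      by_contra hcon
      exact hdne (List.drop_eq_nil_of_le (by omega))
    obtain ⟨f, hf⟩ := hgen
    rcases f with _ | f
    · exact absurd hf hdne
    obtain ⟨d', rts', hEat⟩ : ∃ d' rts', eatA rts St Sdx Sdy = (d', rts') := ⟨_, _, rfl⟩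
    simp only [gen, hEat] at hf
    obtain ⟨e, hel, hloop⟩ := loopB_eat n rts Sb Sa Sq Sx Sy Sdx Sdy St d' rts' hEat
    have hML : loopB n fM rts ⟨Sb, Sa, Sq, Sx, Sy, Sdx, Sdy, St⟩
        = loopB n (fM - e) rts' ⟨Sb, Sa, Sq, Sx, Sy, d'.1, d'.2, St⟩ := by
      rw [show fM = e + (fM - e) from by omega]
      rw [show e + (fM - e) - e = fM - e from by omega]
      exact hloop (fM - e)
    rw [hML]
    obtain ⟨f2, hf2⟩ : ∃ f2, fM - e = f2 + 1 := ⟨fM - e - 1, by omega⟩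
    rw [hf2]
    have hgetDhd : path.getD t (0, 0) = (Sx + d'.1, Sy + d'.2) := by
      by_cases hOut2 : ¬(0 ≤ Sx + d'.1 ∧ Sx + d'.1 < n ∧ 0 ≤ Sy + d'.2 ∧ Sy + d'.2 < n)
      · rw [if_pos hOut2] at hf
        have hf' : path.drop t = (Sx + d'.1, Sy + d'.2) :: [] := by simpa using hf
        exact getD_drop_head _ _ _ _ _ hf'
      · rw [if_neg hOut2, gen_acc] at hf
        have hf' : path.drop t
            = (Sx + d'.1, Sy + d'.2) :: gen n f (St + 1) (Sx + d'.1) (Sy + d'.2) d'.1 d'.2 rts' [] := by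
          simpa using hf
        exact getD_drop_head _ _ _ _ _ hf'
    have hfin : (letI := bDeadDec n ⟨Sb, Sa, Sq, Sx, Sy, d'.1, d'.2, St⟩
        if bDead n ⟨Sb, Sa, Sq, Sx, Sy, d'.1, d'.2, St⟩ then St + 1
        else loopB n f2 rts' (bStep ⟨Sb, Sa, Sq, Sx, Sy, d'.1, d'.2, St⟩))
        = scanB n path (k + 1) t Sb Sa Sq.length := by
      by_cases hdead : bDead n ⟨Sb, Sa, Sq, Sx, Sy, d'.1, d'.2, St⟩
      · rw [if_pos hdead]
        have hcond : ¬(0 ≤ (path.getD t (0, 0)).1 ∧ (path.getD t (0, 0)).1 < n ∧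
              0 ≤ (path.getD t (0, 0)).2 ∧ (path.getD t (0, 0)).2 < n) ∨
            path.getD t (0, 0) ∈ Sb := by
          rw [hgetDhd]
          unfold bDead at hdead
          exact hdead
        simp only [scanB]
        rw [if_pos hcond]
        omega
      · rw [if_neg hdead]
        unfold bDead at hdead
        push Not at hdead
        obtain ⟨hInB, hnb⟩ := hdead
        simp only at hInB hnb
        have hIn : InBp n (Sx + d'.1, Sy + d'.2) := ⟨hInB.1, hInB.2.1, hInB.2.2.1, hInB.2.2.2⟩
        have hrest : path.drop t
            = (Sx + d'.1, Sy + d'.2) :: gen n f (St + 1) (Sx + d'.1) (Sy + d'.2) d'.1 d'.2 rts' [] := by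
          rw [if_neg (by push Not; exact hInB), gen_acc] at hf
          simpa using hf
        obtain ⟨dh, dtl, hdqe⟩ : ∃ dh dtl, Sq = dh :: dtl := by
          rcases hq : Sq with _ | ⟨a, b⟩
          · rw [hq] at hL1; simp at hL1
          · exact ⟨a, b, rfl⟩
        have hdh : path.getD (t - Sq.length) (0, 0) = dh := by
          have h1 : (path.take t).drop (t - Sq.length) = dh :: dtl := by rw [← hdq, hdqe]
          have h2 := getD_drop_head _ _ _ _ ((0 : Int), (0 : Int)) h1
          rwa [getD_take path t (t - Sq.length) (0, 0) (by omega)] at h2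
        have hpt : path[t] = (Sx + d'.1, Sy + d'.2) := by
          rw [← getD_eq_getElem path t (0, 0) htlt, hgetDhd]
        have htake : path.take (t + 1) = path.take t ++ [(Sx + d'.1, Sy + d'.2)] := by
          rw [List.take_add_one, List.getElem?_eq_getElem htlt, hpt]
          rfl
        have hdropt1 : path.drop (t + 1)
            = gen n f (St + 1) (Sx + d'.1) (Sy + d'.2) d'.1 d'.2 rts' [] := by
          rw [← List.tail_drop, hrest]
          rfl
        have hgenEnds : EndsOut n (path.drop (t + 1)) := by
          have hne2 : path.drop (t + 1) ≠ [] := by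
            intro hcon
            have hsingle : path.drop t = [(Sx + d'.1, Sy + d'.2)] := by
              rw [hrest, ← hdropt1, hcon]
            rw [hsingle] at hcl
            simp at hcl
            rw [← hcl] at hclOut
            exact hclOut hIn
          refine ⟨cl, ?_, hclOut⟩
          rw [show path.drop t = [(Sx + d'.1, Sy + d'.2)] ++ path.drop (t + 1) from by
                rw [hrest, ← hdropt1]; rfl,
            lastAppend _ _ hne2] at hcl
          exact hcl
        have hbsA : (Sx + d'.1, Sy + d'.2) ∈ Sa →
            bStep ⟨Sb, Sa, Sq, Sx, Sy, d'.1, d'.2, St⟩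
              = ⟨PySem.Set.add Sb (Sx + d'.1, Sy + d'.2),
                PySem.Set.discard Sa (Sx + d'.1, Sy + d'.2),
                Sq ++ [(Sx + d'.1, Sy + d'.2)],
                Sx + d'.1, Sy + d'.2, d'.1, d'.2, St + 1⟩ := by
          intro hap
          simp only [bStep]
          rw [if_pos hap]
        have hbsN : (Sx + d'.1, Sy + d'.2) ∉ Sa →
            bStep ⟨Sb, Sa, Sq, Sx, Sy, d'.1, d'.2, St⟩
              = ⟨PySem.Set.discard (PySem.Set.add Sb (Sx + d'.1, Sy + d'.2)) dh,
                Sa, dtl ++ [(Sx + d'.1, Sy + d'.2)],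
                Sx + d'.1, Sy + d'.2, d'.1, d'.2, St + 1⟩ := by
          intro hap
          simp only [bStep]
          rw [if_neg hap, hdqe]
          rfl
        have hdqA : Sq ++ [(Sx + d'.1, Sy + d'.2)]
            = (path.take (t + 1)).drop (t + 1 - (Sq.length + 1)) := by
          rw [htake, show t + 1 - (Sq.length + 1) = t - Sq.length from by omega,
            List.drop_append_of_le_length (by rw [List.length_take]; omega), ← hdq]
        have hdqN : dtl ++ [(Sx + d'.1, Sy + d'.2)]
            = (path.take (t + 1)).drop (t + 1 - Sq.length) := by
          rw [htake, List.drop_append_of_le_length (by rw [List.length_take]; omega),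
            show t + 1 - Sq.length = (t - Sq.length) + 1 from by omega,
            ← List.tail_drop, ← hdq, hdqe]
          rfl
        have hdqfacts : 1 ≤ (bStep ⟨Sb, Sa, Sq, Sx, Sy, d'.1, d'.2, St⟩).dq.length ∧
            (bStep ⟨Sb, Sa, Sq, Sx, Sy, d'.1, d'.2, St⟩).dq.length ≤ t + 1 ∧
            (bStep ⟨Sb, Sa, Sq, Sx, Sy, d'.1, d'.2, St⟩).dq
              = (path.take (t + 1)).drop
                  (t + 1 - (bStep ⟨Sb, Sa, Sq, Sx, Sy, d'.1, d'.2, St⟩).dq.length) := by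
          by_cases hap : (Sx + d'.1, Sy + d'.2) ∈ Sa
          · rw [hbsA hap]
            refine ⟨by simp, by simp; omega, by simpa using hdqA⟩
          · rw [hbsN hap]
            have hLd : dtl.length + 1 = Sq.length := by rw [hdqe]; rfl
            refine ⟨by simp, by simp; omega, ?_⟩
            simp only [List.length_append, List.length_cons, List.length_nil]
            rw [show dtl.length + 1 = Sq.length from hLd]
            exact hdqN
        have hrec := ih f2 rts' (bStep ⟨Sb, Sa, Sq, Sx, Sy, d'.1, d'.2, St⟩) (t + 1)
          (by omega)
          (by rw [bStep_t]; push_cast; omega)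
          hdqfacts.1 hdqfacts.2.1 (by omega) hdqfacts.2.2
          ⟨f, by
            rw [bStep_t, bStep_x, bStep_y, bStep_dx, bStep_dy]
            exact hdropt1⟩
          hgenEnds
        rw [hrec]
        -- one scan step
        simp only [scanB]
        rw [if_neg (by
          rw [hgetDhd]
          push Not
          exact ⟨⟨hInB.1, hInB.2.1, hInB.2.2.1, hInB.2.2.2⟩, hnb⟩)]
        by_cases hap : (Sx + d'.1, Sy + d'.2) ∈ Sa
        · rw [if_pos (by rw [hgetDhd]; exact hap), hbsA hap]
          rw [hgetDhd]
          simp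
        · rw [if_neg (by rw [hgetDhd]; exact hap), hbsN hap]
          have hLd : dtl.length + 1 = Sq.length := by rw [hdqe]; rfl
          rw [hgetDhd, hdh]
          simp only [List.length_append, List.length_cons, List.length_nil]
          rw [show dtl.length + 1 = Sq.length from hLd]
    rcases rts' with _ | ⟨⟨tt', cmd'⟩, r'⟩
    · simp only [loopB]
      exact hfin
    · simp only [loopB]
      rw [if_neg (by
        have := eatA_front rts St Sdx Sdy tt' cmd' r' (by rw [hEat])
        omega)]
      exact hfin
-- ==== B with no turns: the trajectory is row 0 and the scan returns n ====

def rowCells (c : Int) : Nat → List (Int × Int)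
  | 0 => []
  | m + 1 => (0, c + 1) :: rowCells (c + 1) m

lemma rowCells_length : ∀ (m : Nat) (c : Int), (rowCells c m).length = m := by
  intro m
  induction m with
  | zero => intro c; rfl
  | succ m ih => intro c; simp [rowCells, ih]

lemma rowCells_getD : ∀ (m : Nat) (c : Int) (j : Nat), j < m →
    (rowCells c m).getD j (0, 0) = (0, c + 1 + (j : Int)) := by
  intro m
  induction m with
  | zero => intro c j hj; omega
  | succ m ih =>
    intro c j hj
    rcases j with _ | j
    · simp [rowCells]
    · rw [show rowCells c (m + 1) = (0, c + 1) :: rowCells (c + 1) m from rfl,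
        List.getD_cons_succ, ih (c + 1) j (by omega)]
      congr 1
      push_cast
      ring

lemma gen_row (n : Int) : ∀ (m f : Nat) (t c : Int), 0 ≤ c → c < n → (n - c).toNat = m →
    m ≤ f → gen n f t 0 c 0 1 [] [] = rowCells c m := by
  intro m
  induction m with
  | zero => intro f t c h0 h1 hm hf; omega
  | succ m ih =>
    intro f t c h0 h1 hm hf
    rcases f with _ | f
    · omega
    simp only [gen, eatA, add_zero]
    by_cases hend : c + 1 < n
    · rw [if_neg (by push Not; omega)]
      rw [gen_acc]
      rw [show gen n f (t + 1) 0 (c + 1) 0 1 [] [] = rowCells (c + 1) m from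
        ih f (t + 1) (c + 1) (by omega) hend (by omega) (by omega)]
      rfl
    · rw [if_pos (by omega)]
      have hm1 : m = 0 := by omega
      subst hm1
      rfl

lemma scan_row (n : Int) (hn : 1 ≤ n) : ∀ (k t : Nat) (occ pantry : PySem.Set (Int × Int))
    (L : Nat), 1 ≤ t → t ≤ n.toNat → t + k = n.toNat + 1 →
    (∀ c ∈ occ, c.2 < (t : Int)) →
    scanB n ((0, 0) :: rowCells 0 n.toNat) k t occ pantry L = n := by
  intro k
  induction k with
  | zero => intro t occ pantry L h1 h2 h3 _; omega
  | succ k ih =>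
    intro t occ pantry L h1 h2 h3 hocc
    obtain ⟨t', rfl⟩ : ∃ t', t = t' + 1 := ⟨t - 1, by omega⟩
    have hhead : ((0, 0) :: rowCells 0 n.toNat).getD (t' + 1) (0, 0) = (0, ((t' + 1 : Nat) : Int)) := by
      rw [List.getD_cons_succ, rowCells_getD n.toNat 0 t' (by omega)]
      congr 1
      push_cast
      ring
    simp only [scanB]
    rw [hhead]
    by_cases hend : t' + 1 = n.toNat
    · rw [if_pos (by left; push Not; intro _ _ _; omega)]
      omega
    · rw [if_neg (by
        push Not
        refine ⟨⟨by omega, by omega, by omega, by omega⟩, ?_⟩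
        intro hmem
        have := hocc _ hmem
        omega)]
      by_cases hap : (0, ((t' + 1 : Nat) : Int)) ∈ pantry
      · rw [if_pos hap]
        refine ih (t' + 2) _ _ _ (by omega) (by omega) (by omega) ?_
        intro c hc
        rcases (PySem.Set.mem_add _ _ _).mp hc with h | h
        · have := hocc c h
          push_cast at this ⊢
          omega
        · subst h
          push_cast
          omega
      · rw [if_neg hap]
        refine ih (t' + 2) _ _ _ (by omega) (by omega) (by omega) ?_
        intro c hc
        have hc' := ((PySem.Set.mem_discard _ _ _).mp hc).1
        rcases (PySem.Set.mem_add _ _ _).mp hc' with h | h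
        · have := hocc c h
          push_cast at this ⊢
          omega
        · subst h
          push_cast
          omega

lemma alt_noturn (n : Int) (apples : List (List Int)) (hn : 1 ≤ n) :
    solution_alt n apples [] = n := by
  unfold solution_alt
  simp only [effTs, List.map_nil, List.foldl_nil, Int.toNat_zero, Nat.zero_add]
  have hpath : gen n (n.toNat + 2) 0 0 0 0 1 [] [(0, 0)]
      = (0, 0) :: rowCells 0 n.toNat := by
    rw [gen_acc, gen_row n n.toNat (n.toNat + 2) 0 0 le_rfl (by omega) (by omega) (by omega)]
    rfl
  rw [hpath]
  have hlen : ((0, 0) :: rowCells 0 n.toNat).length - 1 = n.toNat := by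
    simp [rowCells_length]
  rw [hlen]
  refine scan_row n hn n.toNat 1 PySem.Set.empty _ 1 le_rfl (by omega) (by omega) ?_
  intro c hc
  exact absurd hc List.not_mem_nil

-- ==== B on a non-positive board: the first trajectory cell is already off the board ====
lemma alt_small (n : Int) (apples : List (List Int)) (turns : List (List String)) (hn : n ≤ 0) :
    solution_alt n apples turns = 1 := by
  unfold solution_alt
  dsimp only
  obtain ⟨g, hg⟩ : ∃ g, ((((effTs turns 0 0).map Prod.fst).foldl max 0).toNat + n.toNat + 2)
      = g + 1 := ⟨_, rfl⟩
  rw [hg]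
  simp only [gen]
  have hdo := eatA_dirOK (effTs turns 0 0) 0 0 1 (Or.inl ⟨rfl, rfl⟩)
  have hOOB : ¬(0 ≤ 0 + (eatA (effTs turns 0 0) 0 0 1).1.1 ∧
      0 + (eatA (effTs turns 0 0) 0 0 1).1.1 < n ∧
      0 ≤ 0 + (eatA (effTs turns 0 0) 0 0 1).1.2 ∧
      0 + (eatA (effTs turns 0 0) 0 0 1).1.2 < n) := by
    rcases hdo with ⟨h1, h2⟩ | ⟨h1, h2⟩ | ⟨h1, h2⟩ | ⟨h1, h2⟩ <;> rw [h1, h2] <;>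
      intro hcon <;> omega
  rw [if_pos hOOB]
  simp only [scanB, List.length_append, List.length_cons, List.length_nil]
  rw [show ([((0 : Int), (0 : Int))]
      ++ [(0 + (eatA (effTs turns 0 0) 0 0 1).1.1, 0 + (eatA (effTs turns 0 0) 0 0 1).1.2)]).getD 1 (0, 0)
      = (0 + (eatA (effTs turns 0 0) 0 0 1).1.1, 0 + (eatA (effTs turns 0 0) 0 0 1).1.2) from rfl]
  rw [if_pos (Or.inl hOOB)]
  norm_num
-- ===== VERDICT (by name: the statement is the Claim_ definition above) =====
theorem solution_spec : Claim_equal_solution := by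
  unfold Claim_equal_solution
  intro n apples turns _ hpre
  obtain ⟨hturn, hcase⟩ := hpre
  unfold Spec_solution
  rcases hcase with ⟨hn, hap⟩ | ⟨hn, hap⟩ | ⟨hturns0, hn, hap3⟩
  · -- main branch: A = M (main_eq) and M = B's staged scan (loopB_eq_scanB)
    set ts := effTs turns 0 0 with htsdef
    set M0 : Int := (ts.map Prod.fst).foldl max 0 with hM0def
    have hM0nonneg : (0 : Int) ≤ M0 := init_le_foldl_max _ 0
    have hM0mem : ∀ q ∈ ts, q.1 ≤ M0 := by
      intro q hq
      exact mem_le_foldl_max _ 0 _ (List.mem_map_of_mem hq)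
    have hEFnn : (0 : Int) ≤ effFinal turns 0 0 := effFinal_mono turns 0 0
    have hM0le : M0 ≤ effFinal turns 0 0 := by
      refine foldl_max_le _ 0 _ ?_ hEFnn
      intro b hb
      obtain ⟨q, hq, rfl⟩ := List.mem_map.mp hb
      exact effTs_le_final turns 0 0 q hq
    set fuelG : Nat := M0.toNat + n.toNat + 2 with hfueldef
    set path := gen n fuelG 0 0 0 0 1 ts [(0, 0)] with hpathdef
    have hrep : path = ((0 : Int), (0 : Int)) :: gen n fuelG 0 0 0 0 1 ts [] := by
      rw [hpathdef, gen_acc]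
      rfl
    obtain ⟨hE, hLen⟩ := gen_phase n M0 (M0 - 0).toNat fuelG 0 0 0 0 1 ts rfl hM0mem
      (Or.inl ⟨rfl, rfl⟩) ⟨le_rfl, by omega, le_rfl, by omega⟩ (by omega)
    have hEpath : EndsOut n (path.drop 1) := by
      rw [hrep]
      exact hE
    have hlen1 : path.length = 1 + (gen n fuelG 0 0 0 0 1 ts []).length := by
      rw [hrep]
      simp
      omega
    have h0 := rel_init n apples hn hap
    have hmain := main_eq n turns 0 _ _ h0
    have hbridge := loopB_eq_scanB n path (path.length - 1)
      ((effFinal turns 0 (0 : Int) - 0).toNat + turns.length + n.toNat + 1)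
      ts
      ⟨PySem.Set.empty,
        PySem.Set.ofList (apples.map (fun a =>
          (PySem.List.pyGetD a 0 0 - 1, PySem.List.pyGetD a 1 0 - 1))),
        [(0, 0)], 0, 0, 0, 1, 0⟩ 1
      (by
        rw [effTs_length] at *
        omega)
      (by norm_num)
      (by simp)
      (by simp)
      (by omega)
      (by rw [hrep]; rfl)
      ⟨fuelG, by rw [hrep]; rfl⟩
      hEpath
    unfold solution
    dsimp only
    refine Eq.trans hmain.symm (Eq.trans ?_ (hbridge.trans ?_))
    · rfl
    · unfold solution_alt
      rfl
  · subst hap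
    rw [alt_small n [] turns hn]
    unfold solution
    dsimp only
    exact deg_run n hn turns 0 _ rfl rfl rfl (by show (0:Int) ≤ 0; decide)
      (by show (0:Int) < 4; decide)
  · subst hturns0
    rw [sol_noturn n apples hn, alt_noturn n apples hn]
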